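-- pv_equiv track=rewrite | github.com/KangJuHyeon/Algorithm-quiz | programmers/kakao/92342.py | solution
-- ===== SOURCE A (Python) =====
-- from itertools import combinations_with_replacement
--
-- def solution(n, info):
--     answer = [0 for i in range(11)]
--     win = False
--     max_num = 0 # 라이언이 이길 때 가장 큰 점수 차이
--     # 1. 중복 조합을 이용해 라이언의 점수를 만든다.
--     for res in list(combinations_with_replacement(range(0, 11), n)):
--         now = [0 for i in range(11)]
--         for j in res:
--             now[10 - j] += 1
--         lion = 0
--         apeach = 0
--         # 2. 라이언 점수와 어피치 점수를 비교한다.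
--         for k, (l, p) in enumerate(zip(now, info)):
--             if l == p == 0:
--                 continue
--             if p >= l:
--                 apeach += (10 - k)
--             elif l > p:
--                 lion += (10- k)
--         # 3. 총 점수를 비교해 라이언이 큰 경우 결과를 업데이트 해준다.
--         if lion > apeach:
--             win = True
--             if (lion - apeach) > max_num:
--                 max_num = lion - apeach
--                 answer = now
--
--     # (조건5) 라이언이 우승할 수 없는 경우(무조건 지거나 비기는 경우) [-1]을 리턴해주세요.
--     if not win:
--         return [-1]
--
--     return answer
-- ===== SOURCE B (Python) =====
-- def solution(n, info):
--     # Target k (score 10-k) is won by Lion with info[k]+1 arrows; score 0 (k=10) is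
--     # worth nothing, so enumerate the 2^t subsets of targets 0..9 Lion wins, dump
--     # leftover arrows on score 0, and keep the best (diff, reversed counts) candidate
--     # (ties broken toward more arrows on lower scores, as the problem requires).
--     t = min(len(info), 10)
--     best = None  # (diff, key, counts)
--     for mask in range(1 << t):
--         cost = 0
--         lion = 0
--         apeach = 0
--         now = [0] * 11
--         for k in range(t):
--             if mask // (1 << k) % 2 == 1:
--                 cost += info[k] + 1
--                 now[k] = info[k] + 1
--                 lion += 10 - k
--             elif info[k] > 0:
--                 apeach += 10 - k
--         if cost <= n and lion > apeach:
--             now[10] = n - cost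
--             key = now[::-1]
--             if best is None or (lion - apeach, key) > (best[0], best[1]):
--                 best = (lion - apeach, key, now)
--     return best[2] if best is not None else [-1]
-- ===== Notes on version B (the rewrite author's own statement) =====
-- stated objective: alternative
-- what changed: B enumerates the 2^t subsets of targets Lion wins (info[k]+1 arrows each, leftovers on score 0) with an explicit (diff, reversed-counts) tie-break instead of A's enumeration of all C(n+10,10) arrow distributions (asymptotically fewer candidates, though a timing run did not confirm a speed-up at the measured sizes); Pre_ restricts to the problem's natural domain: n >= 0 (A raises ValueError for n < 0) and nonnegative arrow counts in info (negative counts are malformed input on which A's values are accidental).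
-- outside the precondition, e.g. on solution(2, [2, -1, 2, -2]): A returns [-1], B returns [3, 0, 0, -1, 0, 0, 0, 0, 0, 0, 0]
import Mathlib
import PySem

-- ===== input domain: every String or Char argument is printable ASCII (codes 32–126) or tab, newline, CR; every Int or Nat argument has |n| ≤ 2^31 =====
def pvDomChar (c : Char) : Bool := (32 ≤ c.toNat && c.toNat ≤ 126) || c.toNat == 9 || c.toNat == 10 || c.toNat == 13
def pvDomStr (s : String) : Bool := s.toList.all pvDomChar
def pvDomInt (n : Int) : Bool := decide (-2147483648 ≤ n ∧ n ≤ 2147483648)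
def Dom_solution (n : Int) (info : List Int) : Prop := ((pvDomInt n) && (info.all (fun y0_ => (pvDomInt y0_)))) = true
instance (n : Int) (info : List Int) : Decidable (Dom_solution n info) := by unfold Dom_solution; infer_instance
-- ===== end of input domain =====

-- B replaces A's enumeration of ALL C(n+10,10) arrow distributions by the 2^t subsets of
-- targets Lion wins (info[k]+1 arrows each, leftovers on score 0) with an explicit
-- (diff, reversed-count-vector) tie-break; equivalence is claimed on the problem's
-- natural domain (n ≥ 0, nonnegative arrow counts).

-- ===== PORT A =====

-- hand port of itertools.combinations_with_replacement(range(0, 11), r):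
-- all nondecreasing r-tuples over 0..10 in lexicographic order (exact).
def cwr11 : Nat → Int → List (List Int)
  | 0, _ => [[]]
  | r + 1, lo => (PySem.List.pyRange lo 11 1).flatMap (fun j => (cwr11 r j).map (fun c => j :: c))

-- now = [0]*11; for j in res: now[10 - j] += 1   (j ∈ range(0,11), so index 10-j is in range: exact)
def nowOf (res : List Int) : List Int :=
  res.foldl (fun now j =>
      PySem.List.pySetD now (10 - j) (PySem.List.pyGetD now (10 - j) 0 + 1))
    (List.replicate 11 (0 : Int))

-- the enumerate(zip(now, info)) scoring loop of A
def scoreA (now info : List Int) : Int × Int :=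
  (PySem.List.enumerate (now.zip info) 0).foldl
    (fun (s : Int × Int) kp =>
      if kp.2.1 = 0 ∧ kp.2.2 = 0 then s
      else if kp.2.2 ≥ kp.2.1 then (s.1, s.2 + (10 - kp.1))
      else if kp.2.1 > kp.2.2 then (s.1 + (10 - kp.1), s.2)
      else s)
    (0, 0)

-- the body of A's outer loop (state: answer, win, max_num)
def stepPortA (info : List Int) (st : List Int × Bool × Int) (res : List Int) : List Int × Bool × Int :=
  let now := nowOf res
  let sc := scoreA now info
  if sc.1 > sc.2 then
    (if sc.1 - sc.2 > st.2.2 then (now, true, sc.1 - sc.2) else (st.1, true, st.2.2))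
  else st

def solution (n : Int) (info : List Int) : List Int :=
  -- n < 0 makes combinations_with_replacement raise ValueError: excluded by Pre_ (n.toNat is only used under 0 ≤ n)
  let st := (cwr11 n.toNat 0).foldl (stepPortA info) (List.replicate 11 (0 : Int), false, 0)
  if st.2.1 = false then [-1] else st.1

-- ===== PORT B =====

-- Python's list '>' comparison on int lists (lexicographic; a longer list wins on a strict prefix)
def pyListGt : List Int → List Int → Bool
  | [], _ => false
  | _ :: _, [] => true
  | a :: xs, b :: ys => if b < a then true else if a < b then false else pyListGt xs ys

-- the inner 'for k in range(t)' loop of B; state (cost, lion, apeach, now).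
-- info[k] is in range (k < t ≤ len(info)) and now[k] likewise (k < t ≤ 10 < 11): exact.
def innerB (info : List Int) (t : Nat) (mask : Int) : Int × Int × Int × List Int :=
  (List.range t).foldl
    (fun (s : Int × Int × Int × List Int) k =>
      let p := info.getD k 0
      if PySem.Int.mod (PySem.Int.floordiv mask (2 ^ k)) 2 = 1 then
        (s.1 + p + 1, s.2.1 + (10 - (k : Int)), s.2.2.1, s.2.2.2.set k (p + 1))
      else if p > 0 then (s.1, s.2.1, s.2.2.1 + (10 - (k : Int)), s.2.2.2)
      else s)
    (0, 0, 0, List.replicate 11 (0 : Int))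

-- the body of B's outer loop over masks (best = None or (diff, key, now))
def stepPortB (n : Int) (info : List Int) (t : Nat)
    (best : Option (Int × List Int × List Int)) (mask : Int) :
    Option (Int × List Int × List Int) :=
  let r := innerB info t mask
  if r.1 ≤ n ∧ r.2.2.1 < r.2.1 then
    let now := r.2.2.2.set 10 (n - r.1)   -- now[10] = n - cost (index 10 < 11: exact)
    let key := now.reverse                -- now[::-1]
    match best with
    | none => some (r.2.1 - r.2.2.1, key, now)
    | some b =>
      if b.1 < r.2.1 - r.2.2.1 ∨ (r.2.1 - r.2.2.1 = b.1 ∧ pyListGt key b.2.1) then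
        some (r.2.1 - r.2.2.1, key, now)
      else some b
  else best

def solution_alt (n : Int) (info : List Int) : List Int :=
  let t := min info.length 10
  match (PySem.List.pyRange 0 (2 ^ t) 1).foldl (stepPortB n info t) none with
  | none => [-1]
  | some b => b.2.2

-- ===== PRECONDITION & SPEC =====

-- Pre_ restricts to the problem's natural domain: n ≥ 0 (for n < 0 Python A raises
-- ValueError in combinations_with_replacement) and nonnegative arrow counts in info
-- (negative counts are malformed input, on which A's returned values are accidental).
def Pre_solution (n : Int) (info : List Int) : Prop := 0 ≤ n ∧ ∀ x ∈ info, 0 ≤ x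
instance (n : Int) (info : List Int) : Decidable (Pre_solution n info) := by unfold Pre_solution; infer_instance

def pvWitness_solution : Int × List Int := (2, [1, 0, 0, 0, 0, 0, 0, 0, 0, 0, 0])

def Spec_solution (n : Int) (info : List Int) (out : List Int) : Prop := out = solution_alt n info
instance (n : Int) (info : List Int) (out : List Int) : Decidable (Spec_solution n info out) := by unfold Spec_solution; infer_instance

-- ===== CLAIM (what is proved, stated in full; the proofs are below) =====
def Claim_equal_solution : Prop := ∀ (n : Int) (info : List Int), Dom_solution n info → Pre_solution n info → Spec_solution n info (solution n info)

-- ===== LEMMAS AND PROOFS =====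


-- ---------- proof-side abbreviations ----------

def giD (info : List Int) (k : Nat) : Int := info.getD k 0
def tI (info : List Int) : Nat := min info.length 10
abbrev bitm (m k : Nat) : Prop := m / 2 ^ k % 2 = 1

def cTerm (info : List Int) (m : Nat) (k : Nat) : Int :=
  if 0 ≤ giD info k ∧ bitm m k then giD info k + 1 else 0
def lTerm (info : List Int) (m : Nat) (k : Nat) : Int :=
  if giD info k < 0 ∨ (0 ≤ giD info k ∧ bitm m k) then 10 - (k : Int) else 0
def aTerm (info : List Int) (m : Nat) (k : Nat) : Int :=
  if 0 < giD info k ∧ ¬ bitm m k then 10 - (k : Int) else 0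

def costB (info : List Int) (m : Nat) : Int := ∑ k ∈ Finset.range (tI info), cTerm info m k
def lionB (info : List Int) (m : Nat) : Int := ∑ k ∈ Finset.range (tI info), lTerm info m k
def apeachB (info : List Int) (m : Nat) : Int := ∑ k ∈ Finset.range (tI info), aTerm info m k
def dB (info : List Int) (m : Nat) : Int := lionB info m - apeachB info m

def nwB (n : Int) (info : List Int) (m : Nat) : List Int :=
  (List.range 11).map (fun k =>
    if k = 10 then n - costB info m
    else if k < tI info ∧ 0 ≤ giD info k ∧ bitm m k then giD info k + 1 else 0)
def keyB (n : Int) (info : List Int) (m : Nat) : List Int := (nwB n info m).reverse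
abbrev okB (n : Int) (info : List Int) (m : Nat) : Prop := costB info m ≤ n ∧ apeachB info m < lionB info m

def lionA (info v : List Int) : Int :=
  ∑ k ∈ Finset.range 11, (if k < info.length ∧ giD info k < v.getD k 0 then 10 - (k : Int) else 0)
def apchA (info v : List Int) : Int :=
  ∑ k ∈ Finset.range 11, (if k < info.length ∧ v.getD k 0 ≤ giD info k ∧ ¬ (v.getD k 0 = 0 ∧ giD info k = 0) then 10 - (k : Int) else 0)
def gA (info c : List Int) : Int := lionA info (nowOf c) - apchA info (nowOf c)

def maskA (info v : List Int) : Nat :=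
  ∑ k ∈ Finset.range (tI info), if 0 ≤ giD info k ∧ giD info k < v.getD k 0 then 2 ^ k else 0

def resOf (n : Int) (info : List Int) (m : Nat) : List Int :=
  List.replicate (n - costB info m).toNat (0 : Int) ++
  (List.range 10).flatMap (fun i =>
    if 9 - i < tI info ∧ 0 ≤ giD info (9 - i) ∧ bitm m (9 - i) then
      List.replicate (giD info (9 - i) + 1).toNat ((10 : Int) - ((9 - i : Nat) : Int))
    else [])

def cnts (c : List Int) : List Int := (List.range 11).map (fun (k : Nat) => (c.count ((k : Int)) : Int))

-- ---------- pyListGt order facts ----------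

theorem pyListGt_irrefl (a : List Int) : pyListGt a a = false := by
  induction a with
  | nil => rfl
  | cons x xs ih => simp [pyListGt, ih]

theorem pyListGt_asymm (a b : List Int) (h1 : pyListGt a b = true) (h2 : pyListGt b a = true) : False := by
  induction a generalizing b with
  | nil => simp [pyListGt] at h1
  | cons x xs ih =>
    cases b with
    | nil => simp [pyListGt] at h2
    | cons y ys =>
      simp only [pyListGt] at h1 h2
      by_cases hxy : y < x
      · have : ¬ x < y := by omega
        simp [hxy, this] at h2
      · by_cases hyx : x < y
        · simp [hxy, hyx] at h1
        · simp [hxy, hyx] at h1 h2; exact ih ys h1 h2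

theorem pyListGt_resolve (a c b : List Int) (h : pyListGt a c = true) :
    pyListGt a b = true ∨ pyListGt b c = true := by
  induction a generalizing b c with
  | nil => simp [pyListGt] at h
  | cons x xs ih =>
    cases b with
    | nil => left; rfl
    | cons y ys =>
      cases c with
      | nil =>
        by_cases hyx : y < x
        · left; simp [pyListGt, hyx]
        · right; rfl
      | cons z zs =>
        simp only [pyListGt] at h
        by_cases hyx : y < x
        · left; simp [pyListGt, hyx]
        · by_cases hzx : z < x
          · right
            have : z < y := by omega
            simp [pyListGt, this]
          · have hxz : ¬ x < z := by
              intro hx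
              simp [hzx, hx] at h
            have hxzeq : x = z := by
              by_contra hne
              have : z < x := by
                rcases lt_or_gt_of_ne hne with h1 | h1
                · exact absurd h1 hxz
                · exact h1
              exact hzx this
            simp [hzx, hxz] at h
            by_cases hxy : x < y
            · right
              have : z < y := by omega
              simp [pyListGt, this]
            · have hyxeq : y = x := by omega
              rcases ih zs ys h with h1 | h1
              · left; simp [pyListGt, hyx, hxy, h1]
              · right
                have hzy : ¬ z < y := by omega
                have hyz : ¬ y < z := by omega
                simp only [pyListGt, hzy, hyz, if_false]
                exact h1

-- first-difference characterisation of pyListGt on equal-length lists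
theorem pyListGt_char (a b : List Int) (hlen : a.length = b.length) :
    pyListGt a b = true ↔
      ∃ i, i < a.length ∧ (∀ j, j < i → a.getD j 0 = b.getD j 0) ∧ b.getD i 0 < a.getD i 0 := by
  induction a generalizing b with
  | nil =>
    cases b with
    | nil => simp [pyListGt]
    | cons y ys => simp at hlen
  | cons x xs ih =>
    cases b with
    | nil => simp at hlen
    | cons y ys =>
      simp only [List.length_cons, Nat.add_right_cancel_iff] at hlen
      simp only [pyListGt]
      by_cases hyx : y < x
      · simp only [hyx, if_true, true_iff]
        exact ⟨0, by simp, by omega, by simpa using hyx⟩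
      · by_cases hxy : x < y
        · simp only [hyx, hxy, if_false, if_true]
          constructor
          · intro h; simp at h
          rintro ⟨i, hi, hpre, hlt⟩
          cases i with
          | zero => simp at hlt; omega
          | succ i' =>
            have := hpre 0 (by omega)
            simp at this; omega
        · have heq : x = y := by omega
          simp only [hyx, hxy, if_false]
          rw [ih ys hlen]
          constructor
          · rintro ⟨i, hi, hpre, hlt⟩
            refine ⟨i + 1, by simpa using hi, ?_, by simpa using hlt⟩
            intro j hj
            cases j with
            | zero => simpa using heq
            | succ j' => simpa using hpre j' (by omega)
          · rintro ⟨i, hi, hpre, hlt⟩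
            cases i with
            | zero => simp at hlt; omega
            | succ i' =>
              refine ⟨i', by simpa using hi, ?_, by simpa using hlt⟩
              intro j hj
              have := hpre (j + 1) (by omega)
              simpa using this

-- ---------- sum bridges and small list lemmas ----------

theorem sum_map_range (t : Nat) (f : Nat → Int) :
    ((List.range t).map f).sum = ∑ k ∈ Finset.range t, f k := by
  induction t with
  | zero => simp
  | succ t ih => rw [List.range_succ, Finset.sum_range_succ]; simp [ih]

theorem sum_eq_sum_getD (v : List Int) :
    v.sum = ∑ k ∈ Finset.range v.length, v.getD k 0 := by
  induction v with
  | nil => simp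
  | cons x xs ih =>
    rw [List.length_cons, Finset.sum_range_succ']
    simp only [List.getD_cons_succ, List.getD_cons_zero, List.sum_cons, ih]
    omega

theorem set_map_range (n : Nat) (f : Nat → Int) (i : Nat) (x : Int) :
    ((List.range n).map f).set i x = (List.range n).map (fun k => if k = i then x else f k) := by
  apply List.ext_getElem
  · simp
  · intro j h1 h2
    simp only [List.length_set, List.length_map, List.length_range] at h1
    rw [List.getElem_set]
    simp only [List.getElem_map, List.getElem_range]
    by_cases hj : i = j
    · simp [hj]
    · simp [hj, Ne.symm hj]

theorem getD_map_range' (n : Nat) (f : Nat → Int) (k : Nat) (hk : k < n) :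
    ((List.range n).map f).getD k 0 = f k := by
  rw [List.getD_eq_getElem _ _ (by simpa using hk)]
  simp

theorem getD_nonneg_of_all (info : List Int) (h : ∀ x ∈ info, 0 ≤ x) (k : Nat) :
    0 ≤ info.getD k 0 := by
  by_cases hk : k < info.length
  · rw [List.getD_eq_getElem _ _ hk]
    exact h _ (List.getElem_mem hk)
  · rw [List.getD_eq_default _ _ (by omega)]

-- ---------- innerB characterisation ----------

theorem bit_port (m k : Nat) :
    (PySem.Int.mod (PySem.Int.floordiv ((m : Nat) : Int) ((2 : Int) ^ k)) 2 = 1) ↔ bitm m k := by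
  have h1 : ((2 : Int) ^ k) = ((2 ^ k : Nat) : Int) := by push_cast; ring
  have h2 : (2 : Int) = ((2 : Nat) : Int) := by norm_num
  rw [h1, PySem.Int.floordiv_natCast, h2, PySem.Int.mod_natCast]
  unfold bitm
  constructor
  · intro h; exact_mod_cast h
  · intro h; exact_mod_cast h

theorem map_range_if_ext (t : Nat) (X : Nat → Prop) [DecidablePred X] (y : Nat → Int) (hX : ¬ X t) :
    (List.range 11).map (fun k => if k < t + 1 ∧ X k then y k else 0)
      = (List.range 11).map (fun k => if k < t ∧ X k then y k else 0) := by
  apply List.map_congr_left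
  intro k _
  by_cases h : X k
  · by_cases h2 : k < t
    · simp [h, h2, Nat.lt_succ_of_lt h2]
    · have hkt : ¬ (k < t + 1 ∧ X k) := by
        rintro ⟨h3, _⟩
        have : k = t := by omega
        exact hX (this ▸ h)
      rw [if_neg hkt, if_neg (fun hc => h2 hc.1)]
  · simp [h]

theorem innerB_spec (info : List Int) (hinfo : ∀ k, 0 ≤ info.getD k 0) (m : Nat) :
    ∀ t, t ≤ 11 →
      innerB info t ((m : Nat) : Int) =
        (∑ k ∈ Finset.range t, cTerm info m k,
         ∑ k ∈ Finset.range t, lTerm info m k,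
         ∑ k ∈ Finset.range t, aTerm info m k,
         (List.range 11).map (fun k => if k < t ∧ 0 ≤ giD info k ∧ bitm m k then giD info k + 1 else 0)) := by
  intro t
  induction t with
  | zero =>
    intro _
    unfold innerB
    simp [List.map_const]
  | succ t ih =>
    intro ht
    have hstep : innerB info (t + 1) ((m : Nat) : Int) =
        (fun (s : Int × Int × Int × List Int) (k : Nat) =>
          let p := info.getD k 0
          if PySem.Int.mod (PySem.Int.floordiv ((m : Nat) : Int) (2 ^ k)) 2 = 1 then
            (s.1 + p + 1, s.2.1 + (10 - (k : Int)), s.2.2.1, s.2.2.2.set k (p + 1))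
          else if p > 0 then (s.1, s.2.1, s.2.2.1 + (10 - (k : Int)), s.2.2.2)
          else s) (innerB info t ((m : Nat) : Int)) t := by
      unfold innerB
      rw [List.range_succ, List.foldl_append, List.foldl_cons, List.foldl_nil]
    rw [hstep, ih (by omega)]
    simp only [bit_port m t]
    rw [Finset.sum_range_succ, Finset.sum_range_succ, Finset.sum_range_succ]
    have hp : ¬ info.getD t 0 < 0 := by have := hinfo t; omega
    by_cases hb : bitm m t
    · have hc : cTerm info m t = info.getD t 0 + 1 := by
        simp only [cTerm, giD]; exact if_pos ⟨by omega, hb⟩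
      have hl : lTerm info m t = 10 - (t : Int) := by
        simp only [lTerm, giD]; exact if_pos (Or.inr ⟨by omega, hb⟩)
      have ha : aTerm info m t = 0 := by
        simp only [aTerm, giD]; exact if_neg (by rintro ⟨_, h2⟩; exact h2 hb)
      rw [hc, hl, ha]
      rw [if_pos hb]
      rw [set_map_range]
      refine Prod.ext (by dsimp only; try ring) (Prod.ext (by dsimp only; try ring)
        (Prod.ext (by dsimp only; try ring) ?_))
      dsimp only
      apply List.map_congr_left
      intro k _
      by_cases hk : k = t
      · subst hk
        rw [if_pos rfl, if_pos ⟨by omega, by simp only [giD]; omega, hb⟩]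
        simp [giD]
      · by_cases h2 : k < t ∧ 0 ≤ giD info k ∧ bitm m k
        · rw [if_neg hk, if_pos h2, if_pos ⟨by omega, h2.2⟩]
        · rw [if_neg hk, if_neg h2, if_neg (by rintro ⟨h3, h4⟩; exact h2 ⟨by omega, h4⟩)]
    · by_cases hp0 : info.getD t 0 > 0
      · have hc : cTerm info m t = 0 := by
          simp only [cTerm, giD]; exact if_neg (by rintro ⟨_, h2⟩; exact hb h2)
        have hl : lTerm info m t = 0 := by
          simp only [lTerm, giD]; exact if_neg (by rintro (h1 | ⟨_, h2⟩); omega; exact hb h2)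
        have ha : aTerm info m t = 10 - (t : Int) := by
          simp only [aTerm, giD]; exact if_pos ⟨by omega, hb⟩
        rw [hc, hl, ha, map_range_if_ext t _ _ (by rintro ⟨_, h2⟩; exact hb h2)]
        rw [if_neg hb, if_pos hp0]
        refine Prod.ext (by dsimp only; try ring) (Prod.ext (by dsimp only; try ring)
          (Prod.ext (by dsimp only; try ring) (by dsimp only; try rfl)))
      · have hc : cTerm info m t = 0 := by
          simp only [cTerm, giD]; exact if_neg (by rintro ⟨_, h2⟩; exact hb h2)
        have hl : lTerm info m t = 0 := by
          simp only [lTerm, giD]; exact if_neg (by rintro (h1 | ⟨_, h2⟩); omega; exact hb h2)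
        have ha : aTerm info m t = 0 := by
          simp only [aTerm, giD]; exact if_neg (by rintro ⟨h1, _⟩; omega)
        rw [hc, hl, ha, map_range_if_ext t _ _ (by rintro ⟨_, h2⟩; exact hb h2)]
        rw [if_neg hb, if_neg hp0]
        refine Prod.ext (by dsimp only; try ring) (Prod.ext (by dsimp only; try ring)
          (Prod.ext (by dsimp only; try ring) (by dsimp only; try rfl)))

-- ---------- rewriting solution_alt over Nat masks ----------

def stepN (n : Int) (info : List Int) (best : Option (Int × List Int × List Int)) (m : Nat) :
    Option (Int × List Int × List Int) :=
  if okB n info m then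
    match best with
    | none => some (dB info m, keyB n info m, nwB n info m)
    | some b =>
      if b.1 < dB info m ∨ (dB info m = b.1 ∧ pyListGt (keyB n info m) b.2.1) then
        some (dB info m, keyB n info m, nwB n info m)
      else some b
  else best

theorem tI_le_eleven (info : List Int) : tI info ≤ 11 := by
  unfold tI; exact le_trans (min_le_right _ _) (by norm_num)

theorem stepPortB_eq_stepN (n : Int) (info : List Int) (hinfo : ∀ k, 0 ≤ info.getD k 0)
    (acc : Option (Int × List Int × List Int)) (m : Nat) :
    stepPortB n info (min info.length 10) acc ((m : Nat) : Int) = stepN n info acc m := by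
  have hnw : (((List.range 11).map (fun k =>
      if k < tI info ∧ 0 ≤ giD info k ∧ bitm m k then giD info k + 1 else 0)).set 10
        (n - ∑ k ∈ Finset.range (tI info), cTerm info m k)) = nwB n info m := by
    rw [set_map_range]
    unfold nwB
    apply List.map_congr_left
    intro k _
    simp only [costB]
  unfold stepPortB
  rw [show min info.length 10 = tI info from rfl,
    innerB_spec info hinfo m (tI info) (tI_le_eleven info)]
  dsimp only
  rw [hnw]
  unfold stepN okB dB keyB costB lionB apeachB
  cases acc with
  | none => rfl
  | some b => rfl

theorem alt_spec (n : Int) (info : List Int) (hinfo : ∀ k, 0 ≤ info.getD k 0) :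
    solution_alt n info =
      match (List.range (2 ^ (tI info))).foldl (stepN n info) none with
      | none => [-1]
      | some b => b.2.2 := by
  have hrange : PySem.List.pyRange 0 ((2 : Int) ^ (min info.length 10)) 1
      = (List.range (2 ^ (tI info))).map (fun k => ((k : Nat) : Int)) := by
    rw [PySem.List.pyRange_one]
    have h1 : (((2 : Int) ^ (min info.length 10)) - 0).toNat = 2 ^ (tI info) := by
      rw [show ((2 : Int) ^ (min info.length 10)) = ((2 ^ (min info.length 10) : Nat) : Int) from by
        push_cast; ring, sub_zero, Int.toNat_natCast]
      rfl
    rw [h1]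
    apply List.map_congr_left
    intro k _
    omega
  have hscrut : (PySem.List.pyRange 0 ((2 : Int) ^ (min info.length 10)) 1).foldl
      (stepPortB n info (min info.length 10)) none
      = (List.range (2 ^ (tI info))).foldl (stepN n info) none := by
    rw [hrange, List.foldl_map]
    apply PySem.List.foldl_congr_mem
    intro acc m _
    exact stepPortB_eq_stepN n info hinfo acc m
  unfold solution_alt
  show (match (PySem.List.pyRange 0 ((2 : Int) ^ (min info.length 10)) 1).foldl
      (stepPortB n info (min info.length 10)) none with
    | none => [-1]
    | some b => b.2.2) = _
  rw [hscrut]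

-- ---------- B-fold characterisation ----------

def pGt (p q : Int × List Int) : Prop := q.1 < p.1 ∨ (p.1 = q.1 ∧ pyListGt p.2 q.2 = true)

theorem pGt_irrefl (p : Int × List Int) : ¬ pGt p p := by
  unfold pGt
  rintro (h | ⟨_, h⟩)
  · omega
  · rw [pyListGt_irrefl] at h; exact Bool.false_ne_true h

theorem pGt_asymm (p q : Int × List Int) (h1 : pGt p q) (h2 : pGt q p) : False := by
  unfold pGt at h1 h2
  rcases h1 with h1 | ⟨e1, g1⟩ <;> rcases h2 with h2 | ⟨e2, g2⟩
  · omega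
  · omega
  · omega
  · exact pyListGt_asymm _ _ g1 g2

theorem pGt_resolve (p r q : Int × List Int) (h : pGt p r) : pGt p q ∨ pGt q r := by
  unfold pGt at h ⊢
  rcases h with h | ⟨e, g⟩
  · by_cases h1 : q.1 < p.1
    · left; left; exact h1
    · right; left; omega
  · by_cases h1 : q.1 < p.1
    · left; left; exact h1
    · by_cases h2 : p.1 < q.1
      · right; left; omega
      · rcases pyListGt_resolve p.2 r.2 q.2 g with h3 | h3
        · left; right; exact ⟨by omega, h3⟩
        · right; right; exact ⟨by omega, h3⟩

theorem stepN_cases (n : Int) (info : List Int) (b0 : Option (Int × List Int × List Int)) (m : Nat) :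
    stepN n info b0 m = b0 ∨
      (okB n info m ∧ stepN n info b0 m = some (dB info m, keyB n info m, nwB n info m)) := by
  unfold stepN
  by_cases hok : okB n info m
  · cases b0 with
    | none => right; exact ⟨hok, by simp [hok]⟩
    | some b =>
      by_cases hc : b.1 < dB info m ∨ (dB info m = b.1 ∧ pyListGt (keyB n info m) b.2.1)
      · right; exact ⟨hok, by simp [hok, hc]⟩
      · left; simp [hok, hc]
  · left; simp [hok]

theorem stepN_ne_none (n : Int) (info : List Int) (b : Int × List Int × List Int) (m : Nat) :
    ∃ b', stepN n info (some b) m = some b' ∧ ¬ pGt (b.1, b.2.1) (b'.1, b'.2.1) := by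
  unfold stepN
  by_cases hok : okB n info m
  · by_cases hc : b.1 < dB info m ∨ (dB info m = b.1 ∧ pyListGt (keyB n info m) b.2.1)
    · refine ⟨(dB info m, keyB n info m, nwB n info m), by simp [hok, hc], ?_⟩
      intro hgt
      exact pGt_asymm _ _ hgt (by unfold pGt; simpa using hc)
    · exact ⟨b, by simp [hok, hc], pGt_irrefl _⟩
  · exact ⟨b, by simp [hok], pGt_irrefl _⟩

theorem foldN_mono (n : Int) (info : List Int) (ms : List Nat) :
    ∀ b : Int × List Int × List Int,
      ∃ p, ms.foldl (stepN n info) (some b) = some p ∧ ¬ pGt (b.1, b.2.1) (p.1, p.2.1) := by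
  induction ms with
  | nil => intro b; exact ⟨b, rfl, pGt_irrefl _⟩
  | cons x ms ih =>
    intro b
    obtain ⟨b', hb', hgt⟩ := stepN_ne_none n info b x
    obtain ⟨p, hp, hgt'⟩ := ih b'
    refine ⟨p, by rw [List.foldl_cons, hb', hp], ?_⟩
    intro h
    rcases pGt_resolve _ _ (b'.1, b'.2.1) h with h1 | h1
    · exact hgt h1
    · exact hgt' h1

theorem foldN_none_iff (n : Int) (info : List Int) (ms : List Nat) :
    ms.foldl (stepN n info) none = none ↔ ∀ m ∈ ms, ¬ okB n info m := by
  induction ms with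
  | nil => simp
  | cons x ms ih =>
    rw [List.foldl_cons]
    by_cases hok : okB n info x
    · have h1 : stepN n info none x = some (dB info x, keyB n info x, nwB n info x) := by
        unfold stepN; simp [hok]
      rw [h1]
      obtain ⟨p, hp, _⟩ := foldN_mono n info ms _
      rw [hp]
      simp only [List.mem_cons]
      constructor
      · intro h; exact absurd h (by simp)
      · intro h; exact absurd hok (h x (Or.inl rfl))
    · have h1 : stepN n info none x = none := by unfold stepN; simp [hok]
      rw [h1, ih]
      simp only [List.mem_cons]
      constructor
      · rintro h m (rfl | hm)
        · exact hok
        · exact h m hm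
      · intro h m hm; exact h m (Or.inr hm)

theorem foldN_prov (n : Int) (info : List Int) (ms : List Nat) :
    ∀ b0, ms.foldl (stepN n info) b0 = b0 ∨
      ∃ m ∈ ms, okB n info m ∧
        ms.foldl (stepN n info) b0 = some (dB info m, keyB n info m, nwB n info m) := by
  induction ms with
  | nil => intro b0; left; rfl
  | cons x ms ih =>
    intro b0
    rw [List.foldl_cons]
    rcases stepN_cases n info b0 x with h1 | ⟨hok, h1⟩
    · rw [h1]
      rcases ih b0 with h2 | ⟨m, hm, hok2, h2⟩
      · left; exact h2
      · right; exact ⟨m, List.mem_cons_of_mem _ hm, hok2, h2⟩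
    · rw [h1]
      rcases ih (some (dB info x, keyB n info x, nwB n info x)) with h2 | ⟨m, hm, hok2, h2⟩
      · right; exact ⟨x, List.mem_cons_self .., hok, h2⟩
      · right; exact ⟨m, List.mem_cons_of_mem _ hm, hok2, h2⟩

theorem foldN_bound (n : Int) (info : List Int) (ms : List Nat) :
    ∀ b0 m, m ∈ ms → okB n info m →
      ∃ p, ms.foldl (stepN n info) b0 = some p ∧ ¬ pGt (dB info m, keyB n info m) (p.1, p.2.1) := by
  induction ms with
  | nil => intro _ _ h; exact absurd h (by simp)
  | cons x ms ih =>
    intro b0 m hm hok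
    rw [List.foldl_cons]
    rcases List.mem_cons.mp hm with rfl | hm'
    · have hb1 : ∃ b', stepN n info b0 m = some b' ∧ ¬ pGt (dB info m, keyB n info m) (b'.1, b'.2.1) := by
        unfold stepN
        cases b0 with
        | none => exact ⟨(dB info m, keyB n info m, nwB n info m), by simp [hok], pGt_irrefl _⟩
        | some b =>
          by_cases hc : b.1 < dB info m ∨ (dB info m = b.1 ∧ pyListGt (keyB n info m) b.2.1)
          · exact ⟨(dB info m, keyB n info m, nwB n info m), by simp [hok, hc], pGt_irrefl _⟩
          · exact ⟨b, by simp [hok, hc], by unfold pGt; simpa using hc⟩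
      obtain ⟨b', hb', hgt⟩ := hb1
      rw [hb']
      obtain ⟨p, hp, hgt'⟩ := foldN_mono n info ms b'
      refine ⟨p, hp, ?_⟩
      intro h
      rcases pGt_resolve _ _ (b'.1, b'.2.1) h with h1 | h1
      · exact hgt h1
      · exact hgt' h1
    · exact ih _ m hm' hok


-- ---------- scoreA characterisation ----------

theorem foldl_pair_add {α : Type} (L : List α) (F G : α → Int) :
    ∀ (a b : Int), L.foldl (fun (s : Int × Int) x => (s.1 + F x, s.2 + G x)) (a, b)
      = (a + (L.map F).sum, b + (L.map G).sum) := by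
  induction L with
  | nil => intro a b; simp
  | cons x L ih =>
    intro a b
    rw [List.foldl_cons, ih]
    simp only [List.map_cons, List.sum_cons, Prod.mk.injEq]
    constructor <;> ring

theorem zip_getD (v w : List Int) (k : Nat) (hk : k < v.length) (hk2 : k < w.length) :
    (v.zip w).getD k ((0 : Int), (0 : Int)) = (v.getD k 0, w.getD k 0) := by
  rw [List.getD_eq_getElem _ _ (by rw [List.length_zip]; omega),
    List.getD_eq_getElem _ _ hk, List.getD_eq_getElem _ _ hk2]
  simp

theorem scoreA_spec (info v : List Int) (hv : v.length = 11) :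
    scoreA v info = (lionA info v, apchA info v) := by
  unfold scoreA
  have hfun : (fun (s : Int × Int) (kp : Int × (Int × Int)) =>
      if kp.2.1 = 0 ∧ kp.2.2 = 0 then s
      else if kp.2.2 ≥ kp.2.1 then (s.1, s.2 + (10 - kp.1))
      else if kp.2.1 > kp.2.2 then (s.1 + (10 - kp.1), s.2)
      else s)
      = (fun (s : Int × Int) kp =>
        (s.1 + (if ¬ (kp.2.1 = 0 ∧ kp.2.2 = 0) ∧ ¬ kp.2.2 ≥ kp.2.1 ∧ kp.2.1 > kp.2.2 then 10 - kp.1 else 0),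
         s.2 + (if ¬ (kp.2.1 = 0 ∧ kp.2.2 = 0) ∧ kp.2.2 ≥ kp.2.1 then 10 - kp.1 else 0))) := by
    funext s kp
    by_cases h1 : kp.2.1 = 0 ∧ kp.2.2 = 0
    · simp [h1]
    · by_cases h2 : kp.2.2 ≥ kp.2.1
      · simp [h1, h2]
      · have h3 : kp.2.1 > kp.2.2 := by omega
        simp [h1, h2, h3]
  rw [hfun, foldl_pair_add, zero_add, zero_add]
  have hlen : (v.zip info).length = min 11 info.length := by
    rw [List.length_zip, hv]
  have hsum : ∀ (F : Int × (Int × Int) → Int),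
      ((PySem.List.enumerate (v.zip info) 0).map F).sum
        = ∑ k ∈ Finset.range (min 11 info.length), F ((k : Int), (v.getD k 0, info.getD k 0)) := by
    intro F
    rw [PySem.List.enumerate_eq_map_pyRange (v.zip info) ((0 : Int), (0 : Int)), List.map_map,
      PySem.List.len_eq, PySem.List.pyRange_zero_nat, List.map_map, hlen, sum_map_range]
    apply Finset.sum_congr rfl
    intro k hk
    have hk' : k < min 11 info.length := Finset.mem_range.mp hk
    have hz : PySem.List.pyGetD (v.zip info) ((k : Nat) : Int) ((0 : Int), (0 : Int))
        = (v.getD k 0, info.getD k 0) := by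
      rw [PySem.List.pyGetD_natCast]
      exact zip_getD v info k (by omega) (by omega)
    simp only [Function.comp_apply, hz]
  rw [hsum, hsum]
  have hsplit : ∀ (f : Nat → Int), (∀ k, min 11 info.length ≤ k → k < 11 → f k = 0) →
      ∑ k ∈ Finset.range (min 11 info.length), f k = ∑ k ∈ Finset.range 11, f k := by
    intro f hf
    apply Finset.sum_subset
    · intro x hx
      rw [Finset.mem_range] at *
      omega
    · intro x hx hnx
      rw [Finset.mem_range] at hx
      rw [Finset.mem_range] at hnx
      exact hf x (by omega) hx
  refine Prod.ext ?_ ?_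
  · dsimp only
    unfold lionA
    rw [← hsplit (fun k => if k < info.length ∧ giD info k < v.getD k 0 then 10 - (k : Int) else 0)
      (fun k h1 h2 => by dsimp only; rw [if_neg]; rintro ⟨h3, _⟩; omega)]
    apply Finset.sum_congr rfl
    intro k hk
    have hk' : k < min 11 info.length := Finset.mem_range.mp hk
    simp only [giD]
    by_cases hc : info.getD k 0 < v.getD k 0
    · rw [if_pos ⟨by rintro ⟨h1, h2⟩; omega, by omega, by omega⟩, if_pos ⟨by omega, hc⟩]
    · rw [if_neg (by rintro ⟨h1, h2, h3⟩; omega), if_neg (by rintro ⟨h1, h2⟩; omega)]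
  · dsimp only
    unfold apchA
    rw [← hsplit (fun k => if k < info.length ∧ v.getD k 0 ≤ giD info k ∧
        ¬ (v.getD k 0 = 0 ∧ giD info k = 0) then 10 - (k : Int) else 0)
      (fun k h1 h2 => by dsimp only; rw [if_neg]; rintro ⟨h3, _⟩; omega)]
    apply Finset.sum_congr rfl
    intro k hk
    have hk' : k < min 11 info.length := Finset.mem_range.mp hk
    simp only [giD]
    by_cases hc : v.getD k 0 ≤ info.getD k 0 ∧ ¬ (v.getD k 0 = 0 ∧ info.getD k 0 = 0)
    · rw [if_pos ⟨hc.2, by omega⟩, if_pos ⟨by omega, hc.1, hc.2⟩]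
    · rw [if_neg (by rintro ⟨h1, h2⟩; exact hc ⟨by omega, h1⟩),
        if_neg (by rintro ⟨_, h2, h3⟩; exact hc ⟨h2, h3⟩)]

-- ---------- nowOf characterisation ----------

theorem foldl_inc_spec (c : List Int) :
    ∀ acc : List Int, acc.length = 11 → (∀ j ∈ c, 0 ≤ j ∧ j ≤ 10) →
      (c.foldl (fun now j =>
          PySem.List.pySetD now (10 - j) (PySem.List.pyGetD now (10 - j) 0 + 1)) acc).length = 11 ∧
      ∀ k, k < 11 →
        (c.foldl (fun now j =>
          PySem.List.pySetD now (10 - j) (PySem.List.pyGetD now (10 - j) 0 + 1)) acc).getD k 0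
          = acc.getD k 0 + (c.count (10 - (k : Int)) : Int) := by
  induction c with
  | nil => intro acc h _; exact ⟨h, fun k _ => by simp⟩
  | cons j c ih =>
    intro acc hlen hb
    have hj := hb j (List.mem_cons_self ..)
    have hset : PySem.List.pySetD acc (10 - j) (PySem.List.pyGetD acc (10 - j) 0 + 1)
        = acc.set (10 - j).toNat (acc.getD (10 - j).toNat 0 + 1) := by
      rw [PySem.List.pyGetD_of_nonneg acc 0 (by omega : (0 : Int) ≤ 10 - j),
        PySem.List.pySetD_of_nonneg acc _ (by omega : (0 : Int) ≤ 10 - j)]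
    rw [List.foldl_cons, hset]
    set acc' := acc.set (10 - j).toNat (acc.getD (10 - j).toNat 0 + 1) with hacc'
    have hlen' : acc'.length = 11 := by rw [hacc', List.length_set, hlen]
    obtain ⟨hL, hK⟩ := ih acc' hlen' (fun x hx => hb x (List.mem_cons_of_mem _ hx))
    refine ⟨hL, fun k hk => ?_⟩
    rw [hK k hk]
    have hidx : (10 - j).toNat < 11 := by omega
    have hget : acc'.getD k 0 = acc.getD k 0 + (if (10 - (k : Int)) = j then 1 else 0) := by
      obtain ⟨hj0, hj1⟩ := hj
      rw [hacc']
      rw [List.getD_eq_getElem _ _ (by rw [List.length_set]; omega),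
        List.getD_eq_getElem _ _ (by omega)]
      by_cases hkj : k = (10 - j).toNat
      · subst hkj
        rw [List.getElem_set_self, if_pos (by omega), List.getD_eq_getElem _ _ (by omega)]
      · rw [List.getElem_set_ne (by omega), if_neg (by omega), add_zero,
          List.getD_eq_getElem _ _ (by omega)]
    rw [hget, List.count_cons]
    have hbeq : ((j == 10 - (k : Int)) = true) ↔ ((10 : Int) - (k : Int) = j) := by
      rw [beq_iff_eq]
      exact eq_comm
    by_cases hc : (10 : Int) - (k : Int) = j
    · rw [if_pos hc, if_pos (hbeq.mpr hc)]
      push_cast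
      ring
    · rw [if_neg hc, if_neg (fun h => hc (hbeq.mp h))]
      push_cast
      ring

theorem nowOf_len (c : List Int) : (nowOf c).length = 11 := by
  unfold nowOf
  have : ∀ (L : List Int) (acc : List Int),
      (L.foldl (fun now j =>
        PySem.List.pySetD now (10 - j) (PySem.List.pyGetD now (10 - j) 0 + 1)) acc).length
      = acc.length := by
    intro L
    induction L with
    | nil => intro acc; rfl
    | cons x L ih =>
      intro acc
      rw [List.foldl_cons, ih]
      exact PySem.List.length_pySetD ..
  rw [this]
  simp

theorem nowOf_counts (c : List Int) (hc : ∀ j ∈ c, 0 ≤ j ∧ j ≤ 10) :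
    nowOf c = (List.range 11).map (fun (k : Nat) => ((c.count (10 - (k : Int))) : Int)) := by
  obtain ⟨hL, hK⟩ := foldl_inc_spec c (List.replicate 11 0) (by simp) hc
  apply List.ext_getElem
  · rw [nowOf_len, List.length_map, List.length_range]
  · intro i h1 h2
    simp only [List.length_map, List.length_range] at h2
    have hD : (nowOf c).getD i 0
        = (List.replicate 11 (0 : Int)).getD i 0 + ((c.count (10 - (i : Int))) : Int) := hK i h2
    have hrep : (List.replicate 11 (0 : Int)).getD i 0 = 0 := by
      rw [List.getD_eq_getElem _ _ (by simpa using h2)]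
      exact List.getElem_replicate ..
    rw [← List.getD_eq_getElem _ 0 h1, ← List.getD_eq_getElem _ 0 (by
      rw [List.length_map, List.length_range]; exact h2), hD, getD_map_range' 11 _ i h2, hrep,
      zero_add]

-- ---------- cwr11 lemmas ----------

theorem pairwise_flatMap {α β : Type} (R : β → β → Prop) (f : α → List β) (L : List α)
    (h1 : ∀ a ∈ L, (f a).Pairwise R)
    (h2 : List.Pairwise (fun a a' => ∀ x ∈ f a, ∀ y ∈ f a', R x y) L) :
    (L.flatMap f).Pairwise R := by
  induction L with
  | nil => simp
  | cons a L ih =>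
    rw [List.flatMap_cons, List.pairwise_append]
    rcases List.pairwise_cons.mp h2 with ⟨hx, h2'⟩
    refine ⟨h1 a (List.mem_cons_self ..), ih (fun b hb => h1 b (List.mem_cons_of_mem _ hb)) h2', ?_⟩
    intro x hx' y hy
    rcases List.mem_flatMap.mp hy with ⟨b, hb, hyb⟩
    exact hx b hb x hx' y hyb

theorem mem_cwr : ∀ (r : Nat) (lo : Int) (c : List Int),
    c ∈ cwr11 r lo ↔ (c.length = r ∧ c.Pairwise (· ≤ ·) ∧ ∀ x ∈ c, lo ≤ x ∧ x ≤ 10) := by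
  intro r
  induction r with
  | zero =>
    intro lo c
    constructor
    · intro h
      simp only [cwr11, List.mem_singleton] at h
      subst h
      simp
    · rintro ⟨h1, _, _⟩
      rw [List.length_eq_zero_iff] at h1
      subst h1
      simp [cwr11]
  | succ r ih =>
    intro lo c
    constructor
    · intro h
      simp only [cwr11] at h
      rcases List.mem_flatMap.mp h with ⟨j, hj, hc⟩
      rcases List.mem_map.mp hc with ⟨c', hc', rfl⟩
      rcases (ih j c').mp hc' with ⟨hl, hp, hb⟩
      rcases (PySem.List.mem_pyRange_one).mp hj with ⟨hj1, hj2⟩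
      refine ⟨by simp [hl], ?_, ?_⟩
      · rw [List.pairwise_cons]
        exact ⟨fun x hx => (hb x hx).1, hp⟩
      · intro x hx
        rcases List.mem_cons.mp hx with rfl | hx'
        · exact ⟨hj1, by omega⟩
        · exact ⟨le_trans hj1 (hb x hx').1, (hb x hx').2⟩
    · rintro ⟨hl, hp, hb⟩
      cases c with
      | nil => simp at hl
      | cons j c' =>
        simp only [cwr11]
        apply List.mem_flatMap.mpr
        have hj := hb j (List.mem_cons_self ..)
        refine ⟨j, PySem.List.mem_pyRange_one.mpr ⟨hj.1, by omega⟩, ?_⟩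
        apply List.mem_map.mpr
        refine ⟨c', ?_, rfl⟩
        apply (ih j c').mpr
        rcases List.pairwise_cons.mp hp with ⟨hhead, hp'⟩
        exact ⟨by simpa using hl, hp',
          fun x hx => ⟨hhead x hx, (hb x (List.mem_cons_of_mem _ hx)).2⟩⟩

theorem cwr_sorted_gt : ∀ (r : Nat) (lo : Int),
    (cwr11 r lo).Pairwise (fun a b => pyListGt b a = true) := by
  intro r
  induction r with
  | zero => intro lo; simp [cwr11]
  | succ r ih =>
    intro lo
    simp only [cwr11]
    apply pairwise_flatMap
    · intro j _
      apply List.Pairwise.map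
      · intro a b hab
        simpa [pyListGt, lt_irrefl] using hab
      · exact ih j
    · apply List.Pairwise.imp ?_ (PySem.List.pairwise_lt_pyRange_one lo 11)
      intro j j' hjj'
      intro x hx y hy
      rcases List.mem_map.mp hx with ⟨xs, _, rfl⟩
      rcases List.mem_map.mp hy with ⟨ys, _, rfl⟩
      simp [pyListGt, hjj']


-- ---------- bit arithmetic for maskA ----------

theorem bits_spec (P : Nat → Prop) [DecidablePred P] :
    ∀ t : Nat, (∑ i ∈ Finset.range t, if P i then 2 ^ i else 0) < 2 ^ t ∧
      (∀ k, bitm (∑ i ∈ Finset.range t, if P i then 2 ^ i else 0) k ↔ (k < t ∧ P k)) := by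
  intro t
  induction t with
  | zero =>
    refine ⟨by simp, fun k => ?_⟩
    unfold bitm
    simp
  | succ t ih =>
    obtain ⟨hbd, hbit⟩ := ih
    rw [Finset.sum_range_succ]
    have hpos : 0 < 2 ^ t := Nat.two_pow_pos t
    constructor
    · rw [pow_succ]
      split_ifs <;> omega
    · intro k
      by_cases hk : k < t
      · have e1 : (if P t then 2 ^ t else 0) = (2 * (if P t then 2 ^ (t - k - 1) else 0)) * 2 ^ k := by
          have hp : (2 : Nat) * 2 ^ (t - k - 1) * 2 ^ k = 2 ^ t := by
            rw [← pow_succ', ← pow_add]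
            congr 1
            omega
          split_ifs with h
          · rw [mul_assoc] at hp ⊢
            rw [hp]
          · simp
        unfold bitm
        rw [e1, Nat.add_mul_div_right _ _ (Nat.two_pow_pos k)]
        have hk' := hbit k
        unfold bitm at hk'
        rw [show ((∑ i ∈ Finset.range t, if P i then 2 ^ i else 0) / 2 ^ k
            + 2 * (if P t then 2 ^ (t - k - 1) else 0)) % 2 = 1
          ↔ (∑ i ∈ Finset.range t, if P i then 2 ^ i else 0) / 2 ^ k % 2 = 1 from by omega, hk']
        exact ⟨fun h => ⟨by omega, h.2⟩, fun h => ⟨hk, h.2⟩⟩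
      · by_cases hk2 : k = t
        · subst hk2
          have e2 : (if P k then 2 ^ k else 0) = (if P k then 1 else 0) * 2 ^ k := by
            split_ifs <;> simp
          unfold bitm
          rw [e2, Nat.add_mul_div_right _ _ (Nat.two_pow_pos k),
            Nat.div_eq_of_lt hbd]
          split_ifs with h
          · simp [h]
          · simp [h]
        · have hlt : (∑ i ∈ Finset.range t, if P i then 2 ^ i else 0)
              + (if P t then 2 ^ t else 0) < 2 ^ k := by
            have h1 : 2 ^ (t + 1) ≤ 2 ^ k := Nat.pow_le_pow_right (by omega) (by omega)
            rw [pow_succ] at h1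
            split_ifs <;> omega
          unfold bitm
          rw [Nat.div_eq_of_lt hlt]
          simp
          omega

theorem maskA_spec (info v : List Int) :
    maskA info v < 2 ^ (tI info) ∧
      ∀ k, bitm (maskA info v) k ↔ (k < tI info ∧ 0 ≤ giD info k ∧ giD info k < v.getD k 0) := by
  have h := bits_spec (fun k => 0 ≤ giD info k ∧ giD info k < v.getD k 0) (tI info)
  unfold maskA
  exact ⟨h.1, fun k => (h.2 k).trans (by tauto)⟩

-- ---------- counting sums ----------

theorem count_sum_eq_length (c : List Int) (hc : ∀ j ∈ c, 0 ≤ j ∧ j ≤ 10) :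
    (∑ k ∈ Finset.range 11, (c.count ((k : Int)) : Int)) = (c.length : Int) := by
  induction c with
  | nil => simp
  | cons j c' ih =>
    have hj := hc j (List.mem_cons_self ..)
    have ih' := ih (fun x hx => hc x (List.mem_cons_of_mem _ hx))
    have hterm : ∀ k ∈ Finset.range 11,
        (((j :: c').count ((k : Int)) : Nat) : Int)
          = (c'.count ((k : Int)) : Int) + (if k = j.toNat then 1 else 0) := by
      intro k hk
      have hk' := Finset.mem_range.mp hk
      rw [List.count_cons]
      by_cases h : k = j.toNat
      · rw [if_pos h, if_pos (by rw [beq_iff_eq]; omega)]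
        push_cast
        ring
      · rw [if_neg h, if_neg (by rw [beq_iff_eq]; omega)]
        push_cast
        ring
    rw [Finset.sum_congr rfl hterm, Finset.sum_add_distrib, ih',
      Finset.sum_ite_eq' (Finset.range 11) j.toNat (fun _ => (1 : Int)),
      if_pos (Finset.mem_range.mpr (by omega))]
    simp

theorem nowOf_sum (c : List Int) (hc : ∀ j ∈ c, 0 ≤ j ∧ j ≤ 10) :
    (nowOf c).sum = (c.length : Int) := by
  rw [nowOf_counts c hc, sum_map_range, ← count_sum_eq_length c hc,
    ← Finset.sum_range_reflect (fun k => (c.count ((k : Int)) : Int)) 11]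
  apply Finset.sum_congr rfl
  intro k hk
  have hk' := Finset.mem_range.mp hk
  have harg : (10 : Int) - (k : Int) = ((11 - 1 - k : Nat) : Int) := by omega
  rw [harg]

theorem rev_nowOf (c : List Int) (hc : ∀ j ∈ c, 0 ≤ j ∧ j ≤ 10) :
    (nowOf c).reverse = cnts c := by
  rw [nowOf_counts c hc]
  unfold cnts
  rw [← List.map_reverse]
  have hrev : (List.range 11).reverse = (List.range 11).map (fun k => 10 - k) := by decide
  rw [hrev, List.map_map]
  apply List.map_congr_left
  intro k hk
  have hk' := List.mem_range.mp hk
  simp only [Function.comp_apply]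
  have harg : (10 : Int) - ((10 - k : Nat) : Int) = (k : Int) := by omega
  rw [harg]

theorem sum_squeeze (t : Nat) (f g : Nat → Int) (hle : ∀ k, k < t → f k ≤ g k)
    (hsum : (∑ k ∈ Finset.range t, f k) = ∑ k ∈ Finset.range t, g k) :
    ∀ k, k < t → f k = g k := by
  intro k hk
  by_contra hne
  have h1 : f k < g k := lt_of_le_of_ne (hle k hk) hne
  have h2 : (∑ k ∈ Finset.range t, f k) < ∑ k ∈ Finset.range t, g k := by
    apply Finset.sum_lt_sum
    · intro i hi
      exact hle i (Finset.mem_range.mp hi)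
    · exact ⟨k, Finset.mem_range.mpr hk, h1⟩
  omega


-- ---------- matching A's scores with B's scores ----------

theorem tI_le_ten (info : List Int) : tI info ≤ 10 := min_le_right _ _

theorem sum11_to_t (info : List Int) (f : Nat → Int)
    (hzero : ∀ k, tI info ≤ k → k < 11 → f k = 0) :
    (∑ k ∈ Finset.range 11, f k) = ∑ k ∈ Finset.range (tI info), f k := by
  symm
  apply Finset.sum_subset
  · intro x hx
    rw [Finset.mem_range] at *
    have := tI_le_eleven info
    omega
  · intro x hx hnx
    rw [Finset.mem_range] at hx
    rw [Finset.mem_range] at hnx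
    exact hzero x (by omega) hx

theorem ite_zero_coeff (c : Prop) [Decidable c] : (if c then (0 : Int) else 0) = 0 := by
  split_ifs <;> rfl

theorem lionA_term_high (info v : List Int) (k : Nat) (hk1 : tI info ≤ k) (hk2 : k < 11) :
    (if k < info.length ∧ giD info k < v.getD k 0 then 10 - (k : Int) else 0) = 0 := by
  by_cases hl : k < info.length
  · have hk10 : k = 10 := by unfold tI at hk1; omega
    subst hk10
    rw [show (10 : Int) - ((10 : Nat) : Int) = 0 from by norm_num]
    exact ite_zero_coeff _
  · rw [if_neg (by rintro ⟨h1, _⟩; omega)]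

theorem apchA_term_high (info v : List Int) (k : Nat) (hk1 : tI info ≤ k) (hk2 : k < 11) :
    (if k < info.length ∧ v.getD k 0 ≤ giD info k ∧ ¬ (v.getD k 0 = 0 ∧ giD info k = 0)
      then 10 - (k : Int) else 0) = 0 := by
  by_cases hl : k < info.length
  · have hk10 : k = 10 := by unfold tI at hk1; omega
    subst hk10
    rw [show (10 : Int) - ((10 : Nat) : Int) = 0 from by norm_num]
    exact ite_zero_coeff _
  · rw [if_neg (by rintro ⟨h1, _⟩; omega)]

theorem k_lt_len (info : List Int) (k : Nat) (hk : k < tI info) : k < info.length := by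
  unfold tI at hk; omega

theorem scoresA_maskA (info v : List Int) (hv : v.length = 11) (hnn : ∀ k, 0 ≤ v.getD k 0) :
    lionA info v = lionB info (maskA info v) ∧ apchA info v = apeachB info (maskA info v) := by
  obtain ⟨_, hbits⟩ := maskA_spec info v
  constructor
  · unfold lionA lionB
    rw [sum11_to_t info _ (lionA_term_high info v)]
    apply Finset.sum_congr rfl
    intro k hk
    have hk' := Finset.mem_range.mp hk
    have hlen := k_lt_len info k hk'
    unfold lTerm
    by_cases hc : giD info k < v.getD k 0
    · rw [if_pos ⟨hlen, hc⟩, if_pos]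
      by_cases hg : 0 ≤ giD info k
      · exact Or.inr ⟨hg, (hbits k).mpr ⟨hk', hg, hc⟩⟩
      · exact Or.inl (by omega)
    · rw [if_neg (by rintro ⟨_, h2⟩; exact hc h2), if_neg]
      rintro (h1 | ⟨h2, h3⟩)
      · exact hc (lt_of_lt_of_le h1 (hnn k))
      · exact hc ((hbits k).mp h3).2.2
  · unfold apchA apeachB
    rw [sum11_to_t info _ (apchA_term_high info v)]
    apply Finset.sum_congr rfl
    intro k hk
    have hk' := Finset.mem_range.mp hk
    have hlen := k_lt_len info k hk'
    have hvk := hnn k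
    unfold aTerm
    by_cases hc : v.getD k 0 ≤ giD info k ∧ ¬ (v.getD k 0 = 0 ∧ giD info k = 0)
    · rw [if_pos ⟨hlen, hc⟩, if_pos]
      refine ⟨by omega, fun hb => ?_⟩
      have := ((hbits k).mp hb).2.2
      omega
    · rw [if_neg (by rintro ⟨_, h2, h3⟩; exact hc ⟨h2, h3⟩), if_neg]
      rintro ⟨h1, h2⟩
      apply hc
      have : ¬ bitm (maskA info v) k := h2
      have h3 : ¬ (k < tI info ∧ 0 ≤ giD info k ∧ giD info k < v.getD k 0) :=
        fun hx => this ((hbits k).mpr hx)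
      constructor
      · by_contra h4
        exact h3 ⟨hk', by omega, by omega⟩
      · rintro ⟨_, h5⟩
        omega

theorem nwB_len (n : Int) (info : List Int) (m : Nat) : (nwB n info m).length = 11 := by
  unfold nwB
  rw [List.length_map, List.length_range]

theorem nwB_getD (n : Int) (info : List Int) (m k : Nat) (hk : k < 11) :
    (nwB n info m).getD k 0 = if k = 10 then n - costB info m
      else if k < tI info ∧ 0 ≤ giD info k ∧ bitm m k then giD info k + 1 else 0 := by
  unfold nwB
  exact getD_map_range' 11 _ k hk

theorem scoresA_nwB (n : Int) (info : List Int) (m : Nat) :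
    lionA info (nwB n info m) = lionB info m ∧ apchA info (nwB n info m) = apeachB info m := by
  constructor
  · unfold lionA lionB
    rw [sum11_to_t info _ (lionA_term_high info (nwB n info m))]
    apply Finset.sum_congr rfl
    intro k hk
    have hk' := Finset.mem_range.mp hk
    have hk10 : ¬ (k = 10) := by have := tI_le_ten info; omega
    have hlen := k_lt_len info k hk'
    have hval : (nwB n info m).getD k 0
        = if k < tI info ∧ 0 ≤ giD info k ∧ bitm m k then giD info k + 1 else 0 := by
      rw [nwB_getD n info m k (by have := tI_le_ten info; omega), if_neg hk10]
    unfold lTerm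
    rw [hval]
    by_cases hg : giD info k < 0
    · rw [if_pos, if_pos (Or.inl hg)]
      refine ⟨hlen, ?_⟩
      rw [if_neg (by rintro ⟨_, h2, _⟩; omega)]
      omega
    · by_cases hb : bitm m k
      · rw [if_pos ⟨hlen, by rw [if_pos ⟨hk', by omega, hb⟩]; omega⟩,
          if_pos (Or.inr ⟨by omega, hb⟩)]
      · rw [if_neg, if_neg (by rintro (h1 | ⟨_, h3⟩); omega; exact hb h3)]
        rintro ⟨_, h2⟩
        rw [if_neg (by rintro ⟨_, _, h3⟩; exact hb h3)] at h2
        omega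
  · unfold apchA apeachB
    rw [sum11_to_t info _ (apchA_term_high info (nwB n info m))]
    apply Finset.sum_congr rfl
    intro k hk
    have hk' := Finset.mem_range.mp hk
    have hk10 : ¬ (k = 10) := by have := tI_le_ten info; omega
    have hlen := k_lt_len info k hk'
    have hval : (nwB n info m).getD k 0
        = if k < tI info ∧ 0 ≤ giD info k ∧ bitm m k then giD info k + 1 else 0 := by
      rw [nwB_getD n info m k (by have := tI_le_ten info; omega), if_neg hk10]
    unfold aTerm
    rw [hval]
    by_cases hg : giD info k < 0
    · rw [if_neg, if_neg (by rintro ⟨h1, _⟩; omega)]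
      rintro ⟨_, h2, _⟩
      rw [if_neg (by rintro ⟨_, h3, _⟩; omega)] at h2
      omega
    · by_cases hb : bitm m k
      · rw [if_neg, if_neg (by rintro ⟨_, h2⟩; exact h2 hb)]
        rintro ⟨_, h2, _⟩
        rw [if_pos ⟨hk', by omega, hb⟩] at h2
        omega
      · by_cases hgp : 0 < giD info k
        · rw [if_pos, if_pos ⟨hgp, hb⟩]
          refine ⟨hlen, ?_, ?_⟩
          · rw [if_neg (by rintro ⟨_, _, h3⟩; exact hb h3)]
            omega
          · rw [if_neg (by rintro ⟨_, _, h3⟩; exact hb h3)]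
            rintro ⟨_, h3⟩
            omega
        · rw [if_neg, if_neg (by rintro ⟨h1, _⟩; omega)]
          rintro ⟨_, _, h3⟩
          rw [if_neg (by rintro ⟨_, _, h4⟩; exact hb h4)] at h3
          exact h3 ⟨rfl, by omega⟩

theorem costB_le_sum10 (info v : List Int) (hnn : ∀ k, 0 ≤ v.getD k 0) :
    costB info (maskA info v) ≤ ∑ k ∈ Finset.range 10, v.getD k 0 := by
  obtain ⟨_, hbits⟩ := maskA_spec info v
  unfold costB
  calc (∑ k ∈ Finset.range (tI info), cTerm info (maskA info v) k)
      ≤ ∑ k ∈ Finset.range (tI info), v.getD k 0 := by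
        apply Finset.sum_le_sum
        intro k _
        unfold cTerm
        split_ifs with h
        · have := ((hbits k).mp h.2).2.2
          omega
        · exact hnn k
    _ ≤ ∑ k ∈ Finset.range 10, v.getD k 0 := by
        apply Finset.sum_le_sum_of_subset_of_nonneg
        · intro x hx
          rw [Finset.mem_range] at *
          have := tI_le_ten info
          omega
        · intro i _ _
          exact hnn i

theorem bitm_high (m t k : Nat) (hm : m < 2 ^ t) (hk : t ≤ k) : ¬ bitm m k := by
  unfold bitm
  have h1 : m < 2 ^ k := lt_of_lt_of_le hm (Nat.pow_le_pow_right (by omega) hk)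
  rw [Nat.div_eq_of_lt h1]
  omega

theorem nwB_sum10 (n : Int) (info : List Int) (m : Nat) (hm : m < 2 ^ (tI info)) :
    (∑ k ∈ Finset.range 10, (nwB n info m).getD k 0) = costB info m := by
  have h1 : ∀ k ∈ Finset.range 10, (nwB n info m).getD k 0
      = if k < tI info ∧ 0 ≤ giD info k ∧ bitm m k then giD info k + 1 else 0 := by
    intro k hk
    have hk' := Finset.mem_range.mp hk
    rw [nwB_getD n info m k (by omega), if_neg (by omega)]
  rw [Finset.sum_congr rfl h1]
  unfold costB
  symm
  rw [show (∑ k ∈ Finset.range (tI info), cTerm info m k)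
      = ∑ k ∈ Finset.range 10, cTerm info m k from by
    apply Finset.sum_subset
    · intro x hx
      rw [Finset.mem_range] at *
      have := tI_le_ten info
      omega
    · intro x hx hnx
      rw [Finset.mem_range] at hx hnx
      unfold cTerm
      rw [if_neg (by rintro ⟨_, h2⟩; exact bitm_high m (tI info) x hm (by omega) h2)]]
  apply Finset.sum_congr rfl
  intro k hk
  unfold cTerm
  by_cases h : 0 ≤ giD info k ∧ bitm m k
  · rw [if_pos h]
    by_cases h2 : k < tI info
    · rw [if_pos ⟨h2, h⟩]
    · exact absurd h.2 (bitm_high m (tI info) k hm (by omega))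
  · rw [if_neg h, if_neg (by rintro ⟨_, h2, h3⟩; exact h ⟨h2, h3⟩)]

theorem nwB_sum (n : Int) (info : List Int) (m : Nat) (hm : m < 2 ^ (tI info)) :
    (∑ k ∈ Finset.range 11, (nwB n info m).getD k 0) = n := by
  rw [Finset.sum_range_succ, nwB_sum10 n info m hm, nwB_getD n info m 10 (by omega), if_pos rfl]
  ring

-- ---------- crux 1: a combo's reversed counts never beat its mask's key ----------

theorem rev_getD (l : List Int) (hl : l.length = 11) (j : Nat) (hj : j < 11) :
    l.reverse.getD j 0 = l.getD (10 - j) 0 := by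
  rw [List.getD_eq_getElem _ _ (by rw [List.length_reverse]; omega),
    List.getD_eq_getElem _ _ (by omega), List.getElem_reverse]
  congr 1
  omega

theorem crux1 (n : Int) (info v : List Int) (hv : v.length = 11) (hnn : ∀ k, 0 ≤ v.getD k 0)
    (hsum : v.sum = n) :
    pyListGt (v.reverse) (keyB n info (maskA info v)) = false := by
  obtain ⟨hmlt, hbits⟩ := maskA_spec info v
  have hv10 : v.getD 10 0 = n - ∑ k ∈ Finset.range 10, v.getD k 0 := by
    have h := sum_eq_sum_getD v
    rw [hv, Finset.sum_range_succ, hsum] at h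
    omega
  have hcost10 := costB_le_sum10 info v hnn
  have hlenrev : (v.reverse).length = (keyB n info (maskA info v)).length := by
    unfold keyB
    rw [List.length_reverse, List.length_reverse, hv, nwB_len]
  by_contra hgt
  rw [Bool.not_eq_false] at hgt
  obtain ⟨i, hi, hpre, hlt⟩ := (pyListGt_char _ _ hlenrev).mp hgt
  rw [List.length_reverse, hv] at hi
  have hkey_getD : ∀ j, j < 11 → (keyB n info (maskA info v)).getD j 0
      = (nwB n info (maskA info v)).getD (10 - j) 0 := by
    intro j hj
    exact rev_getD _ (nwB_len ..) j hj
  have hrev_getD : ∀ j, j < 11 → (v.reverse).getD j 0 = v.getD (10 - j) 0 :=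
    fun j hj => rev_getD v hv j hj
  rcases Nat.eq_zero_or_pos i with hi0 | hip
  · subst hi0
    rw [hrev_getD 0 (by omega), hkey_getD 0 (by omega)] at hlt
    rw [nwB_getD n info (maskA info v) 10 (by omega), if_pos rfl] at hlt
    simp only [Nat.sub_zero] at hlt
    omega
  · have h0 := hpre 0 (by omega)
    rw [hrev_getD 0 (by omega), hkey_getD 0 (by omega)] at h0
    rw [nwB_getD n info (maskA info v) 10 (by omega), if_pos rfl] at h0
    simp only [Nat.sub_zero] at h0
    -- sums over range 10 agree, pointwise ≤, so v = nwB
    have hsq : ∀ k, k < 10 → (nwB n info (maskA info v)).getD k 0 = v.getD k 0 := by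
      apply sum_squeeze 10 _ _
      · intro k hk
        rw [nwB_getD n info (maskA info v) k (by omega), if_neg (by omega)]
        by_cases hc : k < tI info ∧ 0 ≤ giD info k ∧ bitm (maskA info v) k
        · rw [if_pos hc]
          have := ((hbits k).mp hc.2.2).2.2
          omega
        · rw [if_neg hc]
          exact hnn k
      · rw [nwB_sum10 n info (maskA info v) hmlt]
        omega
    have heq : v = nwB n info (maskA info v) := by
      apply List.ext_getElem
      · rw [hv, nwB_len]
      · intro j h1 h2
        rw [← List.getD_eq_getElem _ 0 h1, ← List.getD_eq_getElem _ 0 h2]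
        rw [hv] at h1
        by_cases hj : j = 10
        · subst hj
          rw [nwB_getD n info (maskA info v) 10 (by omega), if_pos rfl]
          omega
        · exact (hsq j (by omega)).symm
    rw [hrev_getD i (by omega), hkey_getD i (by omega)] at hlt
    have hvi := congrArg (fun l : List Int => l.getD (10 - i) 0) heq
    simp only at hvi
    omega

-- ---------- crux 2: lexicographically earlier sorted list has lexicographically larger counts ----------

theorem cnts_len (c : List Int) : (cnts c).length = 11 := by
  unfold cnts
  rw [List.length_map, List.length_range]

theorem cnts_getD (c : List Int) (j : Nat) (hj : j < 11) :
    (cnts c).getD j 0 = (c.count ((j : Int)) : Int) := by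
  unfold cnts
  exact getD_map_range' 11 _ j hj

theorem crux2 : ∀ (c c' : List Int), c.length = c'.length →
    c.Pairwise (· ≤ ·) → c'.Pairwise (· ≤ ·) →
    (∀ x ∈ c, 0 ≤ x ∧ x ≤ 10) → (∀ x ∈ c', 0 ≤ x ∧ x ≤ 10) →
    pyListGt c' c = true → pyListGt (cnts c) (cnts c') = true := by
  intro c
  induction c with
  | nil =>
    intro c' hlen _ _ _ _ hgt
    cases c' with
    | nil => simp [pyListGt] at hgt
    | cons y ys => simp at hlen
  | cons a x ih =>
    intro c' hlen hp hp' hb hb' hgt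
    cases c' with
    | nil => simp at hlen
    | cons a' x' =>
      have ha := hb a (List.mem_cons_self ..)
      have ha' := hb' a' (List.mem_cons_self ..)
      have hmemc : ∀ y ∈ a :: x, a ≤ y := by
        intro y hy
        rcases List.mem_cons.mp hy with rfl | hy'
        · exact le_refl _
        · exact (List.pairwise_cons.mp hp).1 y hy'
      have hmemc' : ∀ y ∈ a' :: x', a' ≤ y := by
        intro y hy
        rcases List.mem_cons.mp hy with rfl | hy'
        · exact le_refl _
        · exact (List.pairwise_cons.mp hp').1 y hy'
      simp only [pyListGt] at hgt
      by_cases h1 : a < a'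
      · -- first difference at value a: c has it, c' does not
        apply (pyListGt_char (cnts (a :: x)) (cnts (a' :: x')) (by rw [cnts_len, cnts_len])).mpr
        refine ⟨a.toNat, by rw [cnts_len]; omega, ?_, ?_⟩
        · intro j hj
          rw [cnts_getD _ j (by omega), cnts_getD _ j (by omega)]
          have hzc : (a :: x).count ((j : Int)) = 0 := by
            apply List.count_eq_zero_of_not_mem
            intro hmem
            have := hmemc _ hmem
            omega
          have hzc' : (a' :: x').count ((j : Int)) = 0 := by
            apply List.count_eq_zero_of_not_mem
            intro hmem
            have := hmemc' _ hmem
            omega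
          rw [hzc, hzc']
        · rw [cnts_getD _ a.toNat (by omega), cnts_getD _ a.toNat (by omega)]
          have hcast : ((a.toNat : Nat) : Int) = a := by omega
          rw [hcast]
          have hpos : 0 < (a :: x).count a := by
            rw [List.count_pos_iff]
            exact List.mem_cons_self ..
          have hz : (a' :: x').count a = 0 := by
            apply List.count_eq_zero_of_not_mem
            intro hmem
            have := hmemc' _ hmem
            omega
          rw [hz]
          omega
      · by_cases h2 : a' < a
        · rw [if_neg (by omega), if_pos h2] at hgt
          simp at hgt
        · have heq : a = a' := by omega
          rw [if_neg (by omega), if_neg (by omega)] at hgt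
          have hx := ih x' (by simpa using hlen)
            (List.pairwise_cons.mp hp).2 (List.pairwise_cons.mp hp').2
            (fun y hy => hb y (List.mem_cons_of_mem _ hy))
            (fun y hy => hb' y (List.mem_cons_of_mem _ hy)) hgt
          obtain ⟨i, hi, hpre, hlt⟩ := (pyListGt_char _ _ (by rw [cnts_len, cnts_len])).mp hx
          rw [cnts_len] at hi
          apply (pyListGt_char (cnts (a :: x)) (cnts (a' :: x')) (by rw [cnts_len, cnts_len])).mpr
          have hbump : ∀ (b : Int) (L : List Int) (j : Nat), j < 11 →
              (cnts (b :: L)).getD j 0 = (cnts L).getD j 0 + (if b = (j : Int) then 1 else 0) := by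
            intro b L j hj
            rw [cnts_getD _ j hj, cnts_getD _ j hj, List.count_cons]
            by_cases hc : b = (j : Int)
            · rw [if_pos hc, if_pos (beq_iff_eq.mpr hc)]
              push_cast
              ring
            · rw [if_neg hc, if_neg (fun h => hc (beq_iff_eq.mp h))]
              push_cast
              ring
          refine ⟨i, by rw [cnts_len]; omega, ?_, ?_⟩
          · intro j hj
            rw [hbump a x j (by omega), hbump a' x' j (by omega), heq,
              hpre j hj]
          · rw [hbump a x i (by omega), hbump a' x' i (by omega), heq]
            exact add_lt_add_of_lt_of_le hlt (le_refl _)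


-- ---------- resOf: the canonical combo of a mask ----------

theorem sum_map_range_nat (t : Nat) (f : Nat → Nat) :
    ((List.range t).map f).sum = ∑ k ∈ Finset.range t, f k := by
  induction t with
  | zero => simp
  | succ t ih => rw [List.range_succ, Finset.sum_range_succ]; simp [ih]

theorem count_flatMap {α β : Type} [BEq α] (L : List β) (f : β → List α) (v : α) :
    (L.flatMap f).count v = (L.map (fun b => (f b).count v)).sum := by
  induction L with
  | nil => simp
  | cons b L ih => rw [List.flatMap_cons, List.count_append, ih]; simp

theorem pairwise_replicate_le (v : Int) (n : Nat) :
    (List.replicate n v).Pairwise (· ≤ ·) := by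
  induction n with
  | zero => simp
  | succ n ih =>
    rw [List.replicate_succ, List.pairwise_cons]
    refine ⟨fun y hy => ?_, ih⟩
    rw [List.eq_of_mem_replicate hy]

theorem resOf_bounds (n : Int) (info : List Int) (m : Nat) :
    ∀ x ∈ resOf n info m, 0 ≤ x ∧ x ≤ 10 := by
  intro x hx
  unfold resOf at hx
  rcases List.mem_append.mp hx with h | h
  · rw [List.eq_of_mem_replicate h]
    omega
  · rcases List.mem_flatMap.mp h with ⟨i, hi, hxi⟩
    have hi' := List.mem_range.mp hi
    split_ifs at hxi with hcond
    · rw [List.eq_of_mem_replicate hxi]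
      omega
    · simp at hxi

theorem resOf_sorted (n : Int) (info : List Int) (m : Nat) :
    (resOf n info m).Pairwise (· ≤ ·) := by
  unfold resOf
  rw [List.pairwise_append]
  refine ⟨pairwise_replicate_le 0 _, ?_, ?_⟩
  · apply pairwise_flatMap
    · intro i _
      split_ifs with h
      · exact pairwise_replicate_le _ _
      · simp
    · apply List.Pairwise.imp_of_mem ?_ (List.pairwise_lt_range (n := 10))
      intro i i' hi hi' hii' x hx y hy
      have hi10 := List.mem_range.mp hi
      have hi10' := List.mem_range.mp hi'
      split_ifs at hx hy with h1 h2 h2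
      · rw [List.eq_of_mem_replicate hx, List.eq_of_mem_replicate hy]
        omega
      · simp at hy
      · simp at hx
      · simp at hx
  · intro x hx y hy
    rw [List.eq_of_mem_replicate hx]
    rcases List.mem_flatMap.mp hy with ⟨i, hi, hyi⟩
    split_ifs at hyi with h
    · rw [List.eq_of_mem_replicate hyi]
      have := List.mem_range.mp hi
      omega
    · simp at hyi

theorem resOf_counts (n : Int) (info : List Int) (m : Nat)
    (hcost : costB info m ≤ n) :
    nowOf (resOf n info m) = nwB n info m := by
  rw [nowOf_counts (resOf n info m) (resOf_bounds n info m)]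
  unfold nwB
  apply List.map_congr_left
  intro k hk
  have hk' := List.mem_range.mp hk
  unfold resOf
  rw [List.count_append, count_flatMap, sum_map_range_nat]
  have hrepl : (List.replicate (n - costB info m).toNat (0 : Int)).count (10 - (k : Int))
      = if k = 10 then (n - costB info m).toNat else 0 := by
    rw [List.count_replicate]
    by_cases hc : k = 10
    · rw [if_pos (by rw [beq_iff_eq]; omega), if_pos hc]
    · rw [if_neg (by rw [beq_iff_eq]; omega), if_neg hc]
  have hblock : ∀ i ∈ Finset.range 10,
      ((if 9 - i < tI info ∧ 0 ≤ giD info (9 - i) ∧ bitm m (9 - i) then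
          List.replicate (giD info (9 - i) + 1).toNat ((10 : Int) - ((9 - i : Nat) : Int))
        else []).count (10 - (k : Int)))
      = if i = 9 - k ∧ k < 10 then
          (if k < tI info ∧ 0 ≤ giD info k ∧ bitm m k then (giD info k + 1).toNat else 0)
        else 0 := by
    intro i hi
    have hi' := Finset.mem_range.mp hi
    by_cases hik : i = 9 - k ∧ k < 10
    · have h9 : 9 - i = k := by omega
      rw [if_pos hik, h9]
      split_ifs with hc
      · rw [List.count_replicate, if_pos (by simp)]
      · simp
    · rw [if_neg hik]
      split_ifs with hc
      · rw [List.count_replicate, if_neg (by rw [beq_iff_eq]; omega)]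
      · simp
  rw [Finset.sum_congr rfl hblock]
  by_cases hk10 : k = 10
  · subst hk10
    have hrepl1 : (List.replicate (n - costB info m).toNat (0 : Int)).count (10 - ((10 : Nat) : Int))
        = (n - costB info m).toNat := by
      rw [List.count_replicate, if_pos (by rw [beq_iff_eq]; norm_num)]
    have hz : (∑ i ∈ Finset.range 10, if i = 9 - 10 ∧ (10 : Nat) < 10 then
        (if (10 : Nat) < tI info ∧ 0 ≤ giD info 10 ∧ bitm m 10 then (giD info 10 + 1).toNat else 0)
        else 0) = 0 := by
      apply Finset.sum_eq_zero
      intro i _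
      rw [if_neg (by simp)]
    rw [hrepl1, hz, if_pos rfl]
    push_cast
    omega
  · have hk10' : k < 10 := by omega
    have hrepl0 : (List.replicate (n - costB info m).toNat (0 : Int)).count (10 - (k : Int)) = 0 := by
      rw [List.count_replicate, if_neg (by rw [beq_iff_eq]; omega)]
    have hsum : (∑ i ∈ Finset.range 10, if i = 9 - k ∧ k < 10 then
        (if k < tI info ∧ 0 ≤ giD info k ∧ bitm m k then (giD info k + 1).toNat else 0)
        else 0)
        = (if k < tI info ∧ 0 ≤ giD info k ∧ bitm m k then (giD info k + 1).toNat else 0) := by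
      have hcong : ∀ i ∈ Finset.range 10, (if i = 9 - k ∧ k < 10 then
          (if k < tI info ∧ 0 ≤ giD info k ∧ bitm m k then (giD info k + 1).toNat else 0)
          else 0)
          = if i = 9 - k then
            (if k < tI info ∧ 0 ≤ giD info k ∧ bitm m k then (giD info k + 1).toNat else 0)
            else 0 := by
        intro i _
        by_cases h : i = 9 - k
        · rw [if_pos ⟨h, hk10'⟩, if_pos h]
        · rw [if_neg (by rintro ⟨h1, _⟩; exact h h1), if_neg h]
      rw [Finset.sum_congr rfl hcong,
        Finset.sum_ite_eq' (Finset.range 10) (9 - k) _, if_pos (Finset.mem_range.mpr (by omega))]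
    rw [hrepl0, hsum, if_neg hk10]
    split_ifs with hc
    · push_cast
      omega
    · simp

theorem resOf_len (n : Int) (info : List Int) (m : Nat) (hn : 0 ≤ n)
    (hcost : costB info m ≤ n) (hm : m < 2 ^ (tI info)) :
    ((resOf n info m).length : Int) = n := by
  have h1 := nowOf_sum (resOf n info m) (resOf_bounds n info m)
  rw [resOf_counts n info m hcost] at h1
  have h2 := sum_eq_sum_getD (nwB n info m)
  rw [nwB_len, nwB_sum n info m hm] at h2
  omega

theorem resOf_mem (n : Int) (info : List Int) (m : Nat) (hn : 0 ≤ n)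
    (hcost : costB info m ≤ n) (hm : m < 2 ^ (tI info)) :
    resOf n info m ∈ cwr11 n.toNat 0 := by
  apply (mem_cwr n.toNat 0 (resOf n info m)).mpr
  refine ⟨?_, resOf_sorted n info m, resOf_bounds n info m⟩
  have := resOf_len n info m hn hcost hm
  omega


-- ---------- A-side fold characterisation ----------

def stepA2 (info : List Int) (st : List Int × Bool × Int) (c : List Int) : List Int × Bool × Int :=
  if 0 < gA info c then
    (if st.2.2 < gA info c then (nowOf c, true, gA info c) else (st.1, true, st.2.2))
  else st

theorem stepPortA_eq_stepA2 (info : List Int) (st : List Int × Bool × Int) (c : List Int) :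
    stepPortA info st c = stepA2 info st c := by
  unfold stepPortA stepA2
  simp only [scoreA_spec info (nowOf c) (nowOf_len c)]
  unfold gA
  by_cases h1 : lionA info (nowOf c) > apchA info (nowOf c)
  · rw [if_pos h1,
      if_pos (show (0 : Int) < lionA info (nowOf c) - apchA info (nowOf c) from by omega)]
  · rw [if_neg h1,
      if_neg (show ¬ (0 : Int) < lionA info (nowOf c) - apchA info (nowOf c) from by omega)]

def MA (info : List Int) (L : List (List Int)) (m0 : Int) : Int :=
  L.foldl (fun acc c => max acc (gA info c)) m0

theorem MA_cons (info : List Int) (c : List Int) (L : List (List Int)) (m0 : Int) :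
    MA info (c :: L) m0 = MA info L (max m0 (gA info c)) := rfl

theorem MA_init_le (info : List Int) : ∀ (L : List (List Int)) (m0 : Int), m0 ≤ MA info L m0 := by
  intro L
  induction L with
  | nil => intro m0; exact le_refl _
  | cons c L ih =>
    intro m0
    rw [MA_cons]
    exact le_trans (le_max_left _ _) (ih _)

theorem MA_ge (info : List Int) : ∀ (L : List (List Int)) (m0 : Int) (c : List Int), c ∈ L →
    gA info c ≤ MA info L m0 := by
  intro L
  induction L with
  | nil => intro _ _ h; exact absurd h (by simp)
  | cons x L ih =>
    intro m0 c hc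
    rcases List.mem_cons.mp hc with rfl | hc'
    · rw [MA_cons]
      exact le_trans (le_max_right _ _) (MA_init_le info L _)
    · rw [MA_cons]
      exact ih _ c hc'

theorem MA_attain (info : List Int) : ∀ (L : List (List Int)) (m0 : Int), m0 < MA info L m0 →
    ∃ c, L.find? (fun c => gA info c == MA info L m0) = some c := by
  intro L
  induction L with
  | nil =>
    intro m0 h
    unfold MA at h
    simp at h
  | cons x L ih =>
    intro m0 h
    rw [MA_cons] at h ⊢
    by_cases hx : gA info x = MA info L (max m0 (gA info x))
    · exact ⟨x, by rw [List.find?_cons_of_pos (p := fun c => gA info c == MA info L (max m0 (gA info x))) (beq_iff_eq.mpr hx)]⟩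
    · have h2 : max m0 (gA info x) < MA info L (max m0 (gA info x)) := by
        have h3 := MA_init_le info L (max m0 (gA info x))
        have h4 : max m0 (gA info x) ≠ MA info L (max m0 (gA info x)) := by
          intro he
          by_cases h5 : gA info x ≤ m0
          · rw [max_eq_left h5] at he h
            omega
          · rw [max_eq_right (by omega)] at he
            rw [max_eq_right (by omega)] at hx
            exact hx he
        omega
      obtain ⟨c, hc⟩ := ih (max m0 (gA info x)) h2
      refine ⟨c, ?_⟩
      rw [List.find?_cons_of_neg (p := fun c => gA info c == MA info L (max m0 (gA info x))) (by simp only [beq_iff_eq]; exact hx), hc]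

theorem foldA2_char (info : List Int) : ∀ (L : List (List Int)) (a : List Int) (w : Bool)
    (m0 : Int), 0 ≤ m0 →
    L.foldl (stepA2 info) (a, w, m0)
      = (if m0 < MA info L m0 then
           (((L.find? (fun c => gA info c == MA info L m0)).map nowOf).getD a)
         else a,
         w || L.any (fun c => decide (0 < gA info c)),
         MA info L m0) := by
  intro L
  induction L with
  | nil =>
    intro a w m0 _
    simp only [List.foldl_nil, List.find?_nil, List.any_nil, Bool.or_false]
    rw [if_neg (by unfold MA; simp)]
    rfl
  | cons c L ih =>
    intro a w m0 hm0
    rw [List.foldl_cons, MA_cons]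
    by_cases h1 : 0 < gA info c
    · by_cases h2 : m0 < gA info c
      · rw [show stepA2 info (a, w, m0) c = (nowOf c, true, gA info c) from by
          unfold stepA2
          rw [if_pos h1, if_pos (show (a, w, m0).2.2 < gA info c from h2)]]
        rw [ih (nowOf c) true (gA info c) (by omega)]
        have hmax : max m0 (gA info c) = gA info c := max_eq_right (le_of_lt h2)
        rw [hmax]
        have hMge : gA info c ≤ MA info L (gA info c) := MA_init_le info L _
        have hm0M : m0 < MA info L (gA info c) := by omega
        rw [if_pos hm0M]
        refine Prod.ext ?_ (Prod.ext ?_ rfl)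
        · dsimp only
          by_cases hx : gA info c = MA info L (gA info c)
          · rw [if_neg (by omega), List.find?_cons_of_pos (p := fun c' => gA info c' == MA info L (gA info c)) (beq_iff_eq.mpr hx)]
            simp
          · have hlt : gA info c < MA info L (gA info c) := by omega
            rw [if_pos hlt, List.find?_cons_of_neg (p := fun c' => gA info c' == MA info L (gA info c)) (by simp only [beq_iff_eq]; exact hx)]
            obtain ⟨c', hc'⟩ := MA_attain info L (gA info c) hlt
            rw [hc']
            simp
        · dsimp only
          rw [List.any_cons]
          simp [h1]
      · rw [show stepA2 info (a, w, m0) c = (a, true, m0) from by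
          unfold stepA2
          rw [if_pos h1, if_neg (show ¬ (a, w, m0).2.2 < gA info c from h2)]]
        rw [ih a true m0 hm0]
        have hmax : max m0 (gA info c) = m0 := max_eq_left (by omega)
        rw [hmax]
        refine Prod.ext ?_ (Prod.ext ?_ rfl)
        · dsimp only
          by_cases hM : m0 < MA info L m0
          · rw [if_pos hM, if_pos hM, List.find?_cons_of_neg
              (p := fun c' => gA info c' == MA info L m0) (by
              simp only [beq_iff_eq]
              omega)]
          · rw [if_neg hM, if_neg hM]
        · dsimp only
          rw [List.any_cons]
          simp [h1]
    · rw [show stepA2 info (a, w, m0) c = (a, w, m0) from by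
        unfold stepA2
        rw [if_neg h1]]
      rw [ih a w m0 hm0]
      have hmax : max m0 (gA info c) = m0 := max_eq_left (by omega)
      rw [hmax]
      refine Prod.ext ?_ (Prod.ext ?_ rfl)
      · dsimp only
        by_cases hM : m0 < MA info L m0
        · rw [if_pos hM, if_pos hM, List.find?_cons_of_neg
            (p := fun c' => gA info c' == MA info L m0) (by
            simp only [beq_iff_eq]
            omega)]
        · rw [if_neg hM, if_neg hM]
      · dsimp only
        rw [List.any_cons]
        simp [h1]

theorem find?_first {α : Type} (p : α → Bool) (R : α → α → Prop) :
    ∀ (L : List α), L.Pairwise R → ∀ y, y ∈ L → p y = true →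
      (∀ x ∈ L, p x = true → ¬ R x y) → L.find? p = some y := by
  intro L
  induction L with
  | nil => intro _ y hy; exact absurd hy (by simp)
  | cons z L ih =>
    intro hpw y hy hpy hlast
    rcases List.pairwise_cons.mp hpw with ⟨hz, hpw'⟩
    by_cases hpz : p z = true
    · have hzy : z = y := by
        by_contra hne
        have hyL : y ∈ L := by
          rcases List.mem_cons.mp hy with rfl | h
          · exact absurd rfl hne
          · exact h
        exact hlast z (List.mem_cons_self ..) hpz (hz y hyL)
      rw [List.find?_cons_of_pos hpz, hzy]
    · have hyz : y ≠ z := fun he => hpz (he ▸ hpy)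
      have hyL : y ∈ L := by
        rcases List.mem_cons.mp hy with rfl | h
        · exact absurd rfl hyz
        · exact h
      rw [List.find?_cons_of_neg (by simp [hpz])]
      exact ih hpw' y hyL hpy (fun x hx hpx => hlast x (List.mem_cons_of_mem _ hx) hpx)

-- ---------- assembly ----------

theorem nowOf_nonneg (c : List Int) (hc : ∀ j ∈ c, 0 ≤ j ∧ j ≤ 10) :
    ∀ k, 0 ≤ (nowOf c).getD k 0 := by
  intro k
  by_cases hk : k < 11
  · rw [nowOf_counts c hc, getD_map_range' 11 _ k hk]
    exact Int.natCast_nonneg _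
  · rw [List.getD_eq_default _ _ (by rw [nowOf_len]; omega)]

theorem combo_ok (n : Int) (info : List Int) (hn : 0 ≤ n) (c : List Int)
    (hc : c ∈ cwr11 n.toNat 0) :
    costB info (maskA info (nowOf c)) ≤ n
    ∧ dB info (maskA info (nowOf c)) = gA info c
    ∧ maskA info (nowOf c) < 2 ^ tI info := by
  obtain ⟨hlen, hsrt, hbnd⟩ := (mem_cwr _ _ c).mp hc
  have hnn := nowOf_nonneg c hbnd
  have hq := scoresA_maskA info (nowOf c) (nowOf_len c) hnn
  refine ⟨?_, ?_, (maskA_spec info (nowOf c)).1⟩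
  · have h1 := costB_le_sum10 info (nowOf c) hnn
    have h2 := sum_eq_sum_getD (nowOf c)
    rw [nowOf_len] at h2
    have h3 := nowOf_sum c hbnd
    have h4 : (c.length : Int) = n := by rw [hlen]; omega
    rw [Finset.sum_range_succ] at h2
    have h5 := hnn 10
    omega
  · unfold dB gA
    rw [hq.1, hq.2]

theorem combo_sum_n (n : Int) (info : List Int) (hn : 0 ≤ n) (c : List Int)
    (hc : c ∈ cwr11 n.toNat 0) : (nowOf c).sum = n := by
  obtain ⟨hlen, _, hbnd⟩ := (mem_cwr _ _ c).mp hc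
  rw [nowOf_sum c hbnd, hlen]
  omega

theorem solution_eq_core (n : Int) (info : List Int) (hn : 0 ≤ n)
    (hinfo : ∀ k, 0 ≤ info.getD k 0) :
    solution n info = solution_alt n info := by
  rw [alt_spec n info hinfo]
  unfold solution
  rw [PySem.List.foldl_congr_mem (cwr11 n.toNat 0) (stepPortA info) (stepA2 info)
    (List.replicate 11 0, false, 0) (fun acc x _ => stepPortA_eq_stepA2 info acc x)]
  rw [foldA2_char info (cwr11 n.toNat 0) (List.replicate 11 0) false 0 (le_refl 0)]
  rcases foldN_prov n info (List.range (2 ^ tI info)) none with hres | ⟨m, hm, hok, hres⟩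
  · -- B finds nothing: Lion cannot win
    rw [hres]
    have hnone := (foldN_none_iff n info _).mp hres
    have hany : (cwr11 n.toNat 0).any (fun c => decide (0 < gA info c)) = false := by
      rw [List.any_eq_false]
      intro c hc
      simp only [decide_eq_true_eq]
      intro hpos
      obtain ⟨hcost, hdB, hmlt⟩ := combo_ok n info hn c hc
      have hok : okB n info (maskA info (nowOf c)) := by
        refine ⟨hcost, ?_⟩
        unfold dB at hdB
        omega
      exact hnone _ (List.mem_range.mpr hmlt) hok
    dsimp only
    rw [hany]
    simp
  · -- B finds a best mask m
    rw [hres]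
    have hmrange : m < 2 ^ tI info := List.mem_range.mp hm
    have hcost : costB info m ≤ n := hok.1
    have hdpos : 0 < dB info m := by unfold dB; have := hok.2; omega
    have hresmem := resOf_mem n info m hn hcost hmrange
    have hrescnt := resOf_counts n info m hcost
    have hgres : gA info (resOf n info m) = dB info m := by
      unfold gA dB
      rw [hrescnt, (scoresA_nwB n info m).1, (scoresA_nwB n info m).2]
    have hany : (cwr11 n.toNat 0).any (fun c => decide (0 < gA info c)) = true := by
      rw [List.any_eq_true]
      exact ⟨resOf n info m, hresmem, by simp only [decide_eq_true_eq]; omega⟩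
    have hMge : dB info m ≤ MA info (cwr11 n.toNat 0) 0 := by
      rw [← hgres]
      exact MA_ge info (cwr11 n.toNat 0) 0 _ hresmem
    have hMpos : (0 : Int) < MA info (cwr11 n.toNat 0) 0 := by omega
    obtain ⟨cdag, hcdag⟩ := MA_attain info (cwr11 n.toNat 0) 0 hMpos
    have hcdag_mem : cdag ∈ cwr11 n.toNat 0 := List.mem_of_find?_eq_some hcdag
    have hcdag_pred : gA info cdag = MA info (cwr11 n.toNat 0) 0 := by
      have := List.find?_some hcdag
      simpa using this
    obtain ⟨hcost2, hdB2, hmlt2⟩ := combo_ok n info hn cdag hcdag_mem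
    have hok2 : okB n info (maskA info (nowOf cdag)) := by
      refine ⟨hcost2, ?_⟩
      unfold dB at hdB2
      omega
    obtain ⟨pp, hpp, hnpgt⟩ := foldN_bound n info _ none _ (List.mem_range.mpr hmlt2) hok2
    rw [hres] at hpp
    have hpp' : (dB info m, keyB n info m, nwB n info m) = pp := by
      injection hpp
    have hMle : MA info (cwr11 n.toNat 0) 0 ≤ dB info m := by
      rw [← hpp'] at hnpgt
      unfold pGt at hnpgt
      dsimp only at hnpgt
      rw [hdB2, hcdag_pred] at hnpgt
      omega
    have hMeq : MA info (cwr11 n.toNat 0) 0 = dB info m := le_antisymm hMle hMge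
    have hfind : (cwr11 n.toNat 0).find?
        (fun c => gA info c == MA info (cwr11 n.toNat 0) 0) = some (resOf n info m) := by
      apply find?_first _ (fun a b => pyListGt b a = true) _ (cwr_sorted_gt n.toNat 0) _
        hresmem (by simp only [beq_iff_eq]; rw [hgres, hMeq])
      intro x hx hpx hgtx
      obtain ⟨hlenx, hsrtx, hbndx⟩ := (mem_cwr _ _ x).mp hx
      obtain ⟨hcost3, hdB3, hmlt3⟩ := combo_ok n info hn x hx
      have hgx : gA info x = MA info (cwr11 n.toNat 0) 0 := by simpa using hpx
      have hok3 : okB n info (maskA info (nowOf x)) := by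
        refine ⟨hcost3, ?_⟩
        unfold dB at hdB3
        omega
      obtain ⟨pq, hpq, hnpgt3⟩ := foldN_bound n info _ none _ (List.mem_range.mpr hmlt3) hok3
      rw [hres] at hpq
      have hpq' : (dB info m, keyB n info m, nwB n info m) = pq := by injection hpq
      rw [← hpq'] at hnpgt3
      unfold pGt at hnpgt3
      dsimp only at hnpgt3
      have hkey_le : pyListGt (keyB n info (maskA info (nowOf x))) (keyB n info m) = false := by
        by_contra hkk
        rw [Bool.not_eq_false] at hkk
        exact hnpgt3 (Or.inr ⟨by rw [hdB3, hgx, hMeq], hkk⟩)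
      have hsum_x : (nowOf x).sum = n := combo_sum_n n info hn x hx
      have hcrux1 := crux1 n info (nowOf x) (nowOf_len x) (nowOf_nonneg x hbndx) hsum_x
      have hlen_eq : x.length = (resOf n info m).length := by
        have h1 := resOf_len n info m hn hcost hmrange
        omega
      have hcrux2 := crux2 x (resOf n info m) hlen_eq hsrtx (resOf_sorted n info m)
        hbndx (resOf_bounds n info m) hgtx
      rw [← rev_nowOf x hbndx, ← rev_nowOf (resOf n info m) (resOf_bounds n info m),
        hrescnt] at hcrux2
      rcases pyListGt_resolve _ _ (keyB n info (maskA info (nowOf x))) hcrux2 with hbad | hbad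
      · rw [hcrux1] at hbad
        simp at hbad
      · rw [show (nwB n info m).reverse = keyB n info m from rfl] at hbad
        rw [hkey_le] at hbad
        simp at hbad
    dsimp only
    rw [hany]
    rw [if_neg (by simp), if_pos hMpos, hfind]
    simp only [Option.map_some, Option.getD_some]
    rw [hrescnt]

-- ===== VERDICT (by name: the statement is the Claim_ definition above) =====
theorem solution_spec : Claim_equal_solution := by
  intro n info _ hpre
  unfold Spec_solution
  exact solution_eq_core n info hpre.1 (getD_nonneg_of_all info hpre.2)
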